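-- pv_equiv track=rewrite | github.com/alepulver/game-catalog-builder | game_catalog_builder/utils/signals.py | _company_strict_majority_consensus
-- ===== SOURCE A (Python) =====
-- def _company_strict_majority_consensus(
--     company_sets: dict[str, set[str]],
-- ) -> tuple[tuple[str, ...], list[str]]:
--     """
--     Conservative dev/pub consensus:
--       - require a strict-majority overlap component, and
--       - require a non-empty intersection across that component.
--     """
--     present = [p for p, s in company_sets.items() if s]
--     if len(present) < 2:
--         return (), []
--
--     parent: dict[str, str] = {p: p for p in present}
--
--     def find(x: str) -> str:
--         while parent[x] != x:
--             parent[x] = parent[parent[x]]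
--             x = parent[x]
--         return x
--
--     def union(a: str, b: str) -> None:
--         ra, rb = find(a), find(b)
--         if ra != rb:
--             parent[rb] = ra
--
--     for i, a in enumerate(present):
--         for b in present[i + 1 :]:
--             if not company_sets[a].isdisjoint(company_sets[b]):
--                 union(a, b)
--
--     comps: dict[str, set[str]] = {}
--     for p in present:
--         comps.setdefault(find(p), set()).add(p)
--     groups = list(comps.values())
--     groups.sort(key=lambda s: (-len(s), "+".join(sorted(s))))
--     best = groups[0]
--     if len(best) <= len(present) / 2:
--         return (), []
--
--     providers = tuple(sorted(best))
--     inter = set.intersection(*(company_sets[p] for p in providers))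
--     if not inter:
--         return (), []
--     return providers, [x for x in sorted(inter)]
-- ===== SOURCE B (Python) =====
-- def _company_strict_majority_consensus(
--     company_sets: dict[str, set[str]],
-- ) -> tuple[tuple[str, ...], list[str]]:
--     present = [p for p, s in company_sets.items() if s]
--     if len(present) < 2:
--         return (), []
--
--     # inverted index: company -> providers (in present order) that mention it
--     index: dict[str, list[str]] = {}
--     for p in present:
--         for c in company_sets[p]:
--             index.setdefault(c, []).append(p)
--
--     parent: dict[str, str] = {p: p for p in present}
--
--     def find(x: str) -> str:
--         while parent[x] != x:
--             x = parent[x]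
--         return x
--
--     # providers sharing a company are connected: union consecutive bucket members
--     for ps in index.values():
--         for a, b in zip(ps, ps[1:]):
--             ra, rb = find(a), find(b)
--             if ra != rb:
--                 parent[rb] = ra
--
--     comps: dict[str, set[str]] = {}
--     for p in present:
--         comps.setdefault(find(p), set()).add(p)
--
--     best = None
--     best_key = None
--     for g in comps.values():
--         k = (-len(g), "+".join(sorted(g)))
--         if best is None or k < best_key:
--             best, best_key = g, k
--     if len(best) <= len(present) / 2:
--         return (), []
--
--     providers = tuple(sorted(best))
--     inter = [c for c, ps in index.items() if best.issubset(ps)]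
--     inter.sort()
--     if not inter:
--         return (), []
--     return providers, inter
-- ===== Notes on version B (the rewrite author's own statement) =====
-- stated objective: faster
-- what changed: B replaces A's O(P^2) all-pairs isdisjoint scan with an inverted index from company to the providers naming it, unions only consecutive providers inside each bucket, and computes the final intersection by filtering that same index for companies whose bucket covers the whole winning component; A's quadratic pair loop and its repeated set intersections disappear.
import Mathlib
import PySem

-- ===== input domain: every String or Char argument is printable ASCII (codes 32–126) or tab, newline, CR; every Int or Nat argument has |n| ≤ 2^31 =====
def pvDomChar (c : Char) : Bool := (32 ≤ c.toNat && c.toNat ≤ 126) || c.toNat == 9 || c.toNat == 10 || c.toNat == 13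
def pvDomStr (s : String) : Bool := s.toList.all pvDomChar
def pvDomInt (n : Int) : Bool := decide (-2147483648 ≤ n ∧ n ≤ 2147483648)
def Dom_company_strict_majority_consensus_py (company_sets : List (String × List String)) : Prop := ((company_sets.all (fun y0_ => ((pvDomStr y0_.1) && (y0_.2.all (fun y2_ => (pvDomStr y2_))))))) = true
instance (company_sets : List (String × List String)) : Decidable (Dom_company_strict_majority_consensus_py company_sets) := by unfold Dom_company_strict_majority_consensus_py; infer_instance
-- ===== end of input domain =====

-- B replaces A's O(P^2) all-pairs overlap scan by an inverted index (company -> providers),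
-- unioning only consecutive providers of each bucket, and reads the final intersection off
-- that same index; equivalence of the return values is proved below.

-- ===== PORT A =====
-- company_sets[p]; every lookup in A is at a key of the dict, so KeyError cannot occur
def pvGetSet (cs : PySem.Dict String (List String)) (p : String) : List String :=
  cs.getD p []

-- find(x) with path halving: `while parent[x] != x: parent[x] = parent[parent[x]]; x = parent[x]`.
-- The Python while-loop always terminates; fuel parent.size + 1 is proved sufficient below.
def pvFindA (fuel : Nat) (parent : PySem.Dict String String) (x : String) :
    PySem.Dict String String × String :=
  match fuel with
  | 0 => (parent, x)
  | fuel + 1 =>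
    let px := parent.getD x x
    if px = x then (parent, x)
    else
      let pp := parent.getD px px
      pvFindA fuel (parent.insert x pp) pp

-- union(a, b)
def pvUnionA (parent : PySem.Dict String String) (a b : String) :
    PySem.Dict String String :=
  let fa := pvFindA (parent.size + 1) parent a
  let fb := pvFindA (fa.1.size + 1) fa.1 b
  if fa.2 ≠ fb.2 then fb.1.insert fb.2 fa.2 else fb.1

def company_strict_majority_consensus_py (company_sets : List (String × List String)) :
    List String × List String :=
  let cs : PySem.Dict String (List String) := ⟨company_sets⟩
  let present := (cs.items.filter (fun ps => !ps.2.isEmpty)).map (·.1)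
  if present.length < 2 then ([], []) else
  let parent0 := present.foldl (fun d p => d.insert p p) PySem.Dict.empty
  let parent1 := (PySem.List.enumerate present).foldl (fun par ia =>
      (PySem.List.slice present (some (ia.1 + 1)) none).foldl (fun par b =>
        if PySem.Set.isdisjoint (pvGetSet cs ia.2) (pvGetSet cs b) then par
        else pvUnionA par ia.2 b) par) parent0
  let st := present.foldl
      (fun (st : PySem.Dict String String × PySem.Dict String (PySem.Set String)) p =>
        let fr := pvFindA (st.1.size + 1) st.1 p
        (fr.1, st.2.modify fr.2 PySem.Set.empty (fun s => PySem.Set.add s p)))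
      (parent1, PySem.Dict.empty)
  let groups := st.2.values
  let sortedGroups := PySem.List.sorted2 groups (fun s => -(PySem.Set.len s))
      (fun s => PySem.Str.join "+" (PySem.List.sorted s (fun x => x)))
  let best := sortedGroups.headD []
  -- len(best) <= len(present) / 2 : exact, since n/2 is an exactly-representable float here
  if 2 * PySem.Set.len best ≤ (present.length : Int) then ([], []) else
  let providers := PySem.List.sorted best (fun x => x)
  let inter := match providers with
    | [] => []   -- unreachable: best is non-empty
    | p :: ps => ps.foldl (fun acc q => PySem.Set.inter acc (pvGetSet cs q)) (pvGetSet cs p)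
  if inter.isEmpty then ([], []) else (providers, PySem.List.sorted inter (fun x => x))

-- ===== PORT B =====
-- company_sets[p] on B's side; every lookup is at a key of the dict
def pvGetSetB (cs : PySem.Dict String (List String)) (p : String) : List String :=
  cs.getD p []

-- find(x): `while parent[x] != x: x = parent[x]` (no mutation); fuel as in A's find
def pvFindB (fuel : Nat) (parent : PySem.Dict String String) (x : String) : String :=
  match fuel with
  | 0 => x
  | fuel + 1 =>
    let px := parent.getD x x
    if px = x then x else pvFindB fuel parent px

-- body of B's bucket loop: ra, rb = find(a), find(b); if ra != rb: parent[rb] = ra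
def pvStepB (parent : PySem.Dict String String) (ab : String × String) :
    PySem.Dict String String :=
  let ra := pvFindB (parent.size + 1) parent ab.1
  let rb := pvFindB (parent.size + 1) parent ab.2
  if ra ≠ rb then parent.insert rb ra else parent

def company_strict_majority_consensus_py_alt (company_sets : List (String × List String)) :
    List String × List String :=
  let cs : PySem.Dict String (List String) := ⟨company_sets⟩
  let present := (cs.items.filter (fun ps => !ps.2.isEmpty)).map (·.1)
  if present.length < 2 then ([], []) else
  let index := present.foldl (fun d p =>
      (pvGetSetB cs p).foldl (fun d c => d.modify c [] (fun l => l ++ [p])) d)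
      PySem.Dict.empty
  let parent0 := present.foldl (fun d p => d.insert p p) PySem.Dict.empty
  let parent := index.values.foldl (fun par ps =>
      (ps.zip (PySem.List.slice ps (some 1) none)).foldl pvStepB par) parent0
  let comps := present.foldl (fun comps p =>
      comps.modify (pvFindB (parent.size + 1) parent p) PySem.Set.empty
        (fun s => PySem.Set.add s p)) PySem.Dict.empty
  let bestO := comps.values.foldl
      (fun (b : Option (PySem.Set String × (Int × String))) g =>
        let k := ((-(PySem.Set.len g) : Int),
                  PySem.Str.join "+" (PySem.List.sorted g (fun x => x)))
        match b with
        | none => some (g, k)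
        | some gb =>
          if k.1 < gb.2.1 ∨ (k.1 = gb.2.1 ∧ k.2 < gb.2.2) then some (g, k) else some gb)
      none
  match bestO with
  | none => ([], [])   -- unreachable: present has ≥ 2 providers
  | some gb =>
    let best := gb.1
    if 2 * PySem.Set.len best ≤ (present.length : Int) then ([], []) else
    let providers := PySem.List.sorted best (fun x => x)
    let inter0 := (index.items.filter (fun cps => PySem.Set.issubset best cps.2)).map (·.1)
    let inter := PySem.List.sorted inter0 (fun x => x)
    if inter.isEmpty then ([], []) else (providers, inter)

-- ===== PRECONDITION & SPEC =====
-- The argument is a Python dict[str, set[str]]: its keys are distinct and each value,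
-- being a set, holds distinct elements; an association list with duplicate keys or
-- duplicated set elements does not represent any input A can receive.
def Pre_company_strict_majority_consensus_py (company_sets : List (String × List String)) : Prop :=
  (company_sets.map (·.1)).Nodup ∧ ∀ pr ∈ company_sets, pr.2.Nodup
instance (company_sets : List (String × List String)) :
    Decidable (Pre_company_strict_majority_consensus_py company_sets) := by
  unfold Pre_company_strict_majority_consensus_py; infer_instance

def pvWitness_company_strict_majority_consensus_py : (List (String × List String)) :=
  [("dev", ["acme", "zenith"]), ("pub", ["acme"]), ("web", [])]

def Spec_company_strict_majority_consensus_py (company_sets : List (String × List String))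
    (out : List String × List String) : Prop :=
  out = company_strict_majority_consensus_py_alt company_sets
instance (company_sets : List (String × List String)) (out : List String × List String) :
    Decidable (Spec_company_strict_majority_consensus_py company_sets out) := by
  unfold Spec_company_strict_majority_consensus_py; infer_instance

-- ===== CLAIM (what is proved, stated in full; the proofs are below) =====
def Claim_equal_company_strict_majority_consensus_py : Prop :=
  ∀ (company_sets : List (String × List String)),
    Dom_company_strict_majority_consensus_py company_sets →
    Pre_company_strict_majority_consensus_py company_sets →
    Spec_company_strict_majority_consensus_py company_sets
      (company_strict_majority_consensus_py company_sets)

-- ===== LEMMAS AND PROOFS =====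

def pvIter (f : String → String) : Nat → String → String
  | 0, x => x
  | k+1, x => pvIter f k (f x)

def pvReaches (f : String → String) (x : String) : Prop :=
  ∃ m, f (pvIter f m x) = pvIter f m x

noncomputable def pvDepth (f : String → String) (x : String) : Nat :=
  @dite _ (pvReaches f x) (Classical.propDecidable _) (fun h => Nat.find h) (fun _ => 0)

noncomputable def pvRoot (f : String → String) (x : String) : String :=
  pvIter f (pvDepth f x) x

def pvClosed (S : List String) (f : String → String) : Prop := ∀ x ∈ S, f x ∈ S

def pvGood (S : List String) (f : String → String) : Prop :=
  pvClosed S f ∧ ∀ x ∈ S, ∃ m < S.length, f (pvIter f m x) = pvIter f m x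

theorem pvIter_add (f : String → String) (a b : Nat) (x : String) :
    pvIter f (a + b) x = pvIter f b (pvIter f a x) := by
  induction a generalizing x with
  | zero => simp [pvIter]
  | succ a ih => rw [Nat.succ_add]; simp only [pvIter]; exact ih (f x)

theorem pvIter_succ_right (f : String → String) (k : Nat) (x : String) :
    pvIter f (k + 1) x = f (pvIter f k x) := by
  induction k generalizing x with
  | zero => simp [pvIter]
  | succ k ih => simp only [pvIter]; exact ih (f x)

theorem pvIter_fix (f : String → String) {r : String} (h : f r = r) (k : Nat) :
    pvIter f k r = r := by
  induction k with
  | zero => rfl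
  | succ k ih => rw [pvIter_succ_right, ih, h]

theorem pvDepth_fix {f : String → String} {x : String} (h : pvReaches f x) :
    f (pvIter f (pvDepth f x) x) = pvIter f (pvDepth f x) x := by
  rw [pvDepth]; rw [dif_pos h]; exact Nat.find_spec h

theorem pvDepth_le {f : String → String} {x : String} (h : pvReaches f x) {m : Nat}
    (hm : f (pvIter f m x) = pvIter f m x) : pvDepth f x ≤ m := by
  rw [pvDepth]; rw [dif_pos h]; exact Nat.find_min' h hm

theorem pvRoot_fix {f : String → String} {x : String} (h : pvReaches f x) :
    f (pvRoot f x) = pvRoot f x := pvDepth_fix h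

theorem pvRoot_of_fix {f : String → String} {x : String} (h : f x = x) :
    pvRoot f x = x := by
  have hr : pvReaches f x := ⟨0, h⟩
  have : pvDepth f x ≤ 0 := pvDepth_le hr (m := 0) h
  rw [pvRoot, Nat.le_zero.mp this]; rfl

theorem pvReaches_step {f : String → String} {x : String} (h : pvReaches f x)
    (hx : f x ≠ x) : pvReaches f (f x) := by
  obtain ⟨m, hm⟩ := h
  cases m with
  | zero => exact absurd hm hx
  | succ m => exact ⟨m, hm⟩

theorem pvDepth_step {f : String → String} {x : String} (h : pvReaches f x)
    (hx : f x ≠ x) : pvDepth f x = pvDepth f (f x) + 1 := by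
  have h' := pvReaches_step h hx
  have h1 : pvDepth f x ≤ pvDepth f (f x) + 1 :=
    pvDepth_le h (m := pvDepth f (f x) + 1) (by simpa [pvIter] using pvDepth_fix h')
  have hpos : pvDepth f x ≠ 0 := by
    intro h0
    have := pvDepth_fix h
    rw [h0] at this
    exact hx this
  have h2 : pvDepth f (f x) ≤ pvDepth f x - 1 := by
    have := pvDepth_fix h
    refine pvDepth_le h' (m := pvDepth f x - 1) ?_
    have hx1 : pvDepth f x = (pvDepth f x - 1) + 1 := (Nat.succ_pred_eq_of_ne_zero hpos).symm
    rw [hx1] at this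
    simpa [pvIter] using this
  omega

theorem pvRoot_step {f : String → String} {x : String} (h : pvReaches f x)
    (hx : f x ≠ x) : pvRoot f x = pvRoot f (f x) := by
  rw [pvRoot, pvRoot, pvDepth_step h hx]; rfl

theorem pvRoot_unique {f : String → String} {x r : String} (h : pvReaches f x)
    (hr : f r = r) {k : Nat} (hk : pvIter f k x = r) : pvRoot f x = r := by
  have hd : pvDepth f x ≤ k := pvDepth_le h (by rw [hk, hr])
  have : pvIter f k x = pvIter f (k - pvDepth f x) (pvIter f (pvDepth f x) x) := by
    rw [← pvIter_add]; congr 1; omega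
  rw [this] at hk
  rw [pvRoot]
  have hfix := pvDepth_fix h
  rw [pvIter_fix f hfix] at hk
  exact hk

theorem pvIter_mem {S : List String} {f : String → String} (hc : pvClosed S f)
    {x : String} (hx : x ∈ S) (k : Nat) : pvIter f k x ∈ S := by
  induction k generalizing x with
  | zero => exact hx
  | succ k ih => simp only [pvIter]; exact ih (hc x hx)

theorem pvPig {S : List String} {f : String → String} (hc : pvClosed S f) {d : String → Nat}
    (hd : ∀ x ∈ S, f x ≠ x → d (f x) < d x) :
    ∀ x ∈ S, ∃ m < S.length, f (pvIter f m x) = pvIter f m x := by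
  intro x hx
  by_contra hcon
  push Not at hcon
  have hnofix : ∀ m < S.length, f (pvIter f m x) ≠ pvIter f m x := by
    intro m hm h
    exact absurd h (by intro h'; exact absurd h' (by exact fun _ => (hcon m hm) h'))
  have hmono : ∀ j ≤ S.length, ∀ i < j, d (pvIter f j x) < d (pvIter f i x) := by
    intro j
    induction j with
    | zero => omega
    | succ j ih =>
      intro hj i hi
      have hstep : d (pvIter f (j+1) x) < d (pvIter f j x) := by
        rw [pvIter_succ_right]
        exact hd _ (pvIter_mem hc hx j) (hnofix j (by omega))
      rcases Nat.lt_succ_iff_lt_or_eq.mp hi with h | h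
      · exact lt_trans hstep (ih (by omega) i h)
      · rw [h]; exact hstep
  set L := (List.range (S.length + 1)).map (fun i => pvIter f i x) with hL
  have hnodup : L.Nodup := by
    rw [hL, List.nodup_map_iff_inj_on (by exact List.nodup_range)]
    intro i hi j hj hij
    by_contra hne
    rcases Nat.lt_or_ge i j with h | h
    · have := hmono j (by simpa using Nat.lt_succ_iff.mp (List.mem_range.mp hj)) i h
      rw [hij] at this; omega
    · have hj' : j < i := by omega
      have := hmono i (by simpa using Nat.lt_succ_iff.mp (List.mem_range.mp hi)) j hj'
      rw [hij] at this; omega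
  have hsub : L ⊆ S := by
    intro y hy
    rw [hL] at hy
    obtain ⟨i, _, rfl⟩ := List.mem_map.mp hy
    exact pvIter_mem hc hx i
  have := (List.subperm_of_subset hnodup hsub).length_le
  simp [hL] at this

theorem pvGood_reaches {S : List String} {f : String → String} (hg : pvGood S f)
    {x : String} (hx : x ∈ S) : pvReaches f x := by
  obtain ⟨m, _, hm⟩ := hg.2 x hx
  exact ⟨m, hm⟩

theorem pvGood_dec {S : List String} {f : String → String} (hg : pvGood S f)
    {x : String} (hx : x ∈ S) (hfx : f x ≠ x) : pvDepth f (f x) < pvDepth f x := by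
  rw [pvDepth_step (pvGood_reaches hg hx) hfx]; omega

theorem pvGood_depth_lt {S : List String} {f : String → String} (hg : pvGood S f)
    {x : String} (hx : x ∈ S) : pvDepth f x < S.length := by
  obtain ⟨m, hm, hfix⟩ := hg.2 x hx
  exact lt_of_le_of_lt (pvDepth_le (pvGood_reaches hg hx) hfix) hm

theorem pvGood_root_mem {S : List String} {f : String → String} (hg : pvGood S f)
    {x : String} (hx : x ∈ S) : pvRoot f x ∈ S :=
  pvIter_mem hg.1 hx _

theorem pvDepth_le_dec {S : List String} {f : String → String} {d : String → Nat}
    (hd : ∀ y ∈ S, f y ≠ y → d (f y) < d y) (hc : pvClosed S f) :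
    ∀ n, ∀ x ∈ S, d x ≤ n → pvReaches f x → pvDepth f x ≤ d x := by
  intro n
  induction n with
  | zero =>
    intro x hx hdx hr
    by_cases hfx : f x = x
    · have : pvDepth f x = 0 := Nat.le_zero.mp (pvDepth_le hr (m := 0) hfx)
      omega
    · exact absurd (hd x hx hfx) (by omega)
  | succ n ih =>
    intro x hx hdx hr
    by_cases hfx : f x = x
    · have : pvDepth f x = 0 := Nat.le_zero.mp (pvDepth_le hr (m := 0) hfx)
      omega
    · have h1 := hd x hx hfx
      have h2 := ih (f x) (hc x hx) (by omega) (pvReaches_step hr hfx)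
      rw [pvDepth_step hr hfx]
      omega

-- path-compression-style update: f' x = f (f x), everything else unchanged
theorem pvCompress {S : List String} {f f' : String → String} (hg : pvGood S f)
    {x : String} (hx : x ∈ S)
    (hf' : ∀ y, f' y = if y = x then f (f x) else f y) :
    pvGood S f' ∧ (∀ y ∈ S, f' y ≠ y → pvDepth f (f' y) < pvDepth f y) ∧
      (∀ y ∈ S, pvRoot f' y = pvRoot f y) := by
  have hc := hg.1
  have hc' : pvClosed S f' := by
    intro y hy
    rw [hf' y]
    split
    · exact hc _ (hc _ hx)
    · exact hc _ hy
  have hdec' : ∀ y ∈ S, f' y ≠ y → pvDepth f (f' y) < pvDepth f y := by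
    intro y hy hne
    rw [hf' y] at hne ⊢
    by_cases hyx : y = x
    · subst hyx
      rw [if_pos rfl] at hne ⊢
      have hfx : f y ≠ y := by
        intro h
        rw [h, h] at hne
        exact hne rfl
      by_cases hffx : f (f y) = f y
      · rw [hffx]
        exact pvGood_dec hg hy hfx
      · exact lt_trans (pvGood_dec hg (hc _ hy) hffx) (pvGood_dec hg hy hfx)
    · rw [if_neg hyx] at hne ⊢
      exact pvGood_dec hg hy hne
  have hg' : pvGood S f' := ⟨hc', pvPig hc' hdec'⟩
  refine ⟨hg', hdec', ?_⟩
  -- Root preservation, by strong induction on pvDepth f y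
  have main : ∀ n, ∀ y ∈ S, pvDepth f y ≤ n → ∃ k, pvIter f' k y = pvRoot f y := by
    intro n
    induction n with
    | zero =>
      intro y hy hdy
      by_cases hfy : f y = y
      · refine ⟨0, ?_⟩
        rw [pvRoot_of_fix hfy]; rfl
      · exact absurd (pvGood_dec hg hy hfy) (by omega)
    | succ n ih =>
      intro y hy hdy
      by_cases hfy : f y = y
      · exact ⟨0, by rw [pvRoot_of_fix hfy]; rfl⟩
      · by_cases hyx : y = x
        · subst hyx
          have hmem : f (f y) ∈ S := hc _ (hc _ hy)
          have hdep : pvDepth f (f (f y)) < pvDepth f y := by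
            by_cases hffx : f (f y) = f y
            · rw [hffx]; exact pvGood_dec hg hy hfy
            · exact lt_trans (pvGood_dec hg (hc _ hy) hffx) (pvGood_dec hg hy hfy)
          obtain ⟨k, hk⟩ := ih (f (f y)) hmem (by omega)
          refine ⟨k + 1, ?_⟩
          have hroot2 : pvRoot f (f (f y)) = pvRoot f y := by
            by_cases hffx : f (f y) = f y
            · rw [hffx, ← pvRoot_step (pvGood_reaches hg hy) hfy]
            · rw [← pvRoot_step (pvGood_reaches hg (hc _ hy)) hffx,
                ← pvRoot_step (pvGood_reaches hg hy) hfy]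
          rw [← hroot2, ← hk]
          simp only [pvIter]
          rw [hf' y, if_pos rfl]
        · obtain ⟨k, hk⟩ := ih (f y) (hc _ hy)
            (by have := pvGood_dec hg hy hfy; omega)
          refine ⟨k + 1, ?_⟩
          rw [pvRoot_step (pvGood_reaches hg hy) hfy, ← hk]
          simp only [pvIter]
          rw [hf' y, if_neg hyx]
  intro y hy
  obtain ⟨k, hk⟩ := main (pvDepth f y) y hy le_rfl
  have hfixr : f' (pvRoot f y) = pvRoot f y := by
    rw [hf']
    by_cases hrx : pvRoot f y = x
    · rw [if_pos hrx]
      have hfix := pvRoot_fix (pvGood_reaches hg hy)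
      rw [hrx] at hfix
      rw [hfix, hfix, ← hrx]
    · rw [if_neg hrx]
      exact pvRoot_fix (pvGood_reaches hg hy)
  exact pvRoot_unique (pvGood_reaches hg' hy) hfixr hk

-- union-style update: parent[rb] := ra with ra, rb distinct roots
theorem pvUnionUpd {S : List String} {f f' : String → String} (hg : pvGood S f)
    {ra rb : String} (hra : ra ∈ S) (hrb : rb ∈ S)
    (hfra : f ra = ra) (hfrb : f rb = rb) (hne : ra ≠ rb)
    (hf' : ∀ y, f' y = if y = rb then ra else f y) :
    pvGood S f' ∧
      (∀ y ∈ S, pvRoot f' y = if pvRoot f y = rb then ra else pvRoot f y) := by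
  have hc := hg.1
  have hc' : pvClosed S f' := by
    intro y hy
    rw [hf' y]
    split
    · exact hra
    · exact hc _ hy
  have hdec' : ∀ y ∈ S, f' y ≠ y →
      (fun z => if pvRoot f z = rb then pvDepth f z + 1 else pvDepth f z) (f' y) <
      (fun z => if pvRoot f z = rb then pvDepth f z + 1 else pvDepth f z) y := by
    intro y hy hne'
    simp only
    rw [hf' y] at hne' ⊢
    by_cases hyrb : y = rb
    · subst hyrb
      rw [if_pos rfl] at hne' ⊢
      rw [pvRoot_of_fix hfra, if_neg hne, pvRoot_of_fix hfrb, if_pos rfl]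
      have : pvDepth f ra = 0 := Nat.le_zero.mp (pvDepth_le ⟨0, hfra⟩ (m := 0) hfra)
      omega
    · rw [if_neg hyrb] at hne' ⊢
      have hroot : pvRoot f (f y) = pvRoot f y := (pvRoot_step (pvGood_reaches hg hy) hne').symm
      rw [hroot]
      have := pvGood_dec hg hy hne'
      split <;> omega
  have hg' : pvGood S f' := ⟨hc', pvPig (d := fun z => if pvRoot f z = rb then pvDepth f z + 1 else pvDepth f z) hc' hdec'⟩
  refine ⟨hg', ?_⟩
  have main : ∀ n, ∀ y ∈ S, pvDepth f y ≤ n →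
      ∃ k, pvIter f' k y = (if pvRoot f y = rb then ra else pvRoot f y) := by
    intro n
    induction n with
    | zero =>
      intro y hy hdy
      by_cases hfy : f y = y
      · rw [pvRoot_of_fix hfy]
        by_cases hyrb : y = rb
        · subst hyrb
          rw [if_pos rfl]
          exact ⟨1, by simp only [pvIter]; rw [hf' y, if_pos rfl]⟩
        · rw [if_neg hyrb]
          exact ⟨0, rfl⟩
      · exact absurd (pvGood_dec hg hy hfy) (by omega)
    | succ n ih =>
      intro y hy hdy
      by_cases hfy : f y = y
      · rw [pvRoot_of_fix hfy]
        by_cases hyrb : y = rb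
        · subst hyrb
          rw [if_pos rfl]
          exact ⟨1, by simp only [pvIter]; rw [hf' y, if_pos rfl]⟩
        · rw [if_neg hyrb]
          exact ⟨0, rfl⟩
      · have hyrb : y ≠ rb := by
          intro h; subst h; exact hfy hfrb
        obtain ⟨k, hk⟩ := ih (f y) (hc _ hy) (by have := pvGood_dec hg hy hfy; omega)
        refine ⟨k + 1, ?_⟩
        rw [pvRoot_step (pvGood_reaches hg hy) hfy, ← hk]
        simp only [pvIter]
        rw [hf' y, if_neg hyrb]
  intro y hy
  obtain ⟨k, hk⟩ := main (pvDepth f y) y hy le_rfl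
  have hfixr : f' (if pvRoot f y = rb then ra else pvRoot f y) =
      (if pvRoot f y = rb then ra else pvRoot f y) := by
    split
    · rw [hf' ra, if_neg hne]; exact hfra
    · rename_i hnrb
      rw [hf' _, if_neg hnrb]
      exact pvRoot_fix (pvGood_reaches hg hy)
  exact pvRoot_unique (pvGood_reaches hg' hy) hfixr hk

def pvPget (par : PySem.Dict String String) (x : String) : String := par.getD x x

theorem pvPget_insert (par : PySem.Dict String String) (k v y : String) :
    pvPget (par.insert k v) y = if y = k then v else pvPget par y := by
  simp [pvPget, PySem.Dict.getD_insert]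

theorem pvKeys_length (par : PySem.Dict String String) : par.keys.length = par.size := by
  simp [PySem.Dict.keys, PySem.Dict.size]

theorem pvKeys_insert_of_mem (par : PySem.Dict String String) {k : String} (v : String)
    (hk : k ∈ par.keys) : (par.insert k v).keys = par.keys := by
  apply PySem.Dict.keys_insert_of_contains
  rw [PySem.Dict.contains_iff_mem_keys]
  exact hk

-- the initial parent dict {p: p for p in present}
theorem pvPar0_items {S : List String} (hnd : S.Nodup) :
    (S.foldl (fun d p => d.insert p p) PySem.Dict.empty).items = S.map (fun p => (p, p)) := by
  have := PySem.Dict.items_foldl_insert_fresh S (fun p => p) (fun p => p) PySem.Dict.empty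
    (by intro a _; simp [PySem.Dict.contains_empty]) (by simpa using hnd)
  simpa [PySem.Dict.empty] using this

theorem pvPar0_keys {S : List String} (hnd : S.Nodup) :
    (S.foldl (fun d p => d.insert p p) PySem.Dict.empty).keys = S := by
  rw [PySem.Dict.keys, pvPar0_items hnd]
  simp [Function.comp_def]

theorem pvPar0_pget {S : List String} (hnd : S.Nodup) (x : String) :
    pvPget (S.foldl (fun d p => d.insert p p) PySem.Dict.empty) x = x := by
  rw [pvPget, PySem.Dict.getD]
  cases hg : (S.foldl (fun d p => d.insert p p) PySem.Dict.empty).get? x with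
  | none => rfl
  | some v =>
    have := PySem.Dict.mem_items_of_get?_eq_some _ hg
    rw [pvPar0_items hnd] at this
    obtain ⟨p, _, hp⟩ := List.mem_map.mp this
    have : p = x ∧ p = v := by
      constructor
      · exact congrArg Prod.fst hp
      · exact congrArg Prod.snd hp
    simp [← this.1, this.2]

theorem pvGood_id (S : List String) : pvGood S (fun x => x) := by
  refine ⟨fun x hx => hx, fun x hx => ⟨0, ?_, rfl⟩⟩
  exact List.length_pos_of_mem hx

theorem pvFindB_eq {S : List String} {par : PySem.Dict String String}
    (hg : pvGood S (pvPget par)) :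
    ∀ (fuel : Nat) (x : String), x ∈ S → pvDepth (pvPget par) x < fuel →
      pvFindB fuel par x = pvRoot (pvPget par) x := by
  intro fuel
  induction fuel with
  | zero => intro x _ h; omega
  | succ fuel ih =>
    intro x hx hd
    show (if par.getD x x = x then x else pvFindB fuel par (par.getD x x)) =
      pvRoot (pvPget par) x
    by_cases hfx : par.getD x x = x
    · rw [if_pos hfx, pvRoot_of_fix (show pvPget par x = x from hfx)]
    · rw [if_neg hfx]
      have hfx' : pvPget par x ≠ x := hfx
      have hdx := pvGood_dec hg hx hfx'
      show pvFindB fuel par (pvPget par x) = pvRoot (pvPget par) x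
      rw [ih (pvPget par x) (hg.1 x hx) (by omega),
        ← pvRoot_step (pvGood_reaches hg hx) hfx']

theorem pvFindA_spec {S : List String} :
    ∀ (fuel : Nat) (par : PySem.Dict String String) (x : String),
      par.keys = S → pvGood S (pvPget par) → x ∈ S →
      pvDepth (pvPget par) x < fuel →
      (pvFindA fuel par x).2 = pvRoot (pvPget par) x ∧
      (pvFindA fuel par x).1.keys = S ∧
      pvGood S (pvPget (pvFindA fuel par x).1) ∧
      (∀ y ∈ S, pvRoot (pvPget (pvFindA fuel par x).1) y = pvRoot (pvPget par) y) := by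
  intro fuel
  induction fuel with
  | zero => intro par x _ _ _ h; omega
  | succ fuel ih =>
    intro par x hkeys hg hx hd
    by_cases hfx : par.getD x x = x
    · have : pvFindA (fuel + 1) par x = (par, x) := by
        show (if par.getD x x = x then (par, x) else _) = (par, x)
        rw [if_pos hfx]
      rw [this]
      exact ⟨(pvRoot_of_fix (show pvPget par x = x from hfx)).symm, hkeys, hg,
        fun y _ => rfl⟩
    · set f := pvPget par with hf
      have hfx' : f x ≠ x := hfx
      set pp := par.getD (par.getD x x) (par.getD x x) with hpp
      have hppf : pp = f (f x) := rfl
      have hstep : pvFindA (fuel + 1) par x = pvFindA fuel (par.insert x pp) pp := by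
        show (if par.getD x x = x then (par, x) else pvFindA fuel (par.insert x pp) pp) = _
        rw [if_neg hfx]
      set par' := par.insert x pp with hpar'
      have hf' : ∀ y, pvPget par' y = if y = x then f (f x) else f y := by
        intro y
        rw [hpar', pvPget_insert, hppf]
      obtain ⟨hg', hdec', hroots⟩ := pvCompress hg hx hf'
      have hkeys' : par'.keys = S := by
        rw [hpar', pvKeys_insert_of_mem par pp (hkeys ▸ hx), hkeys]
      have hppS : pp ∈ S := by
        rw [hppf]; exact hg.1 _ (hg.1 _ hx)
      have hreach' : pvReaches (pvPget par') pp := pvGood_reaches hg' hppS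
      have hdepth' : pvDepth (pvPget par') pp ≤ pvDepth f pp :=
        pvDepth_le_dec hdec' hg'.1 (pvDepth f pp) pp hppS le_rfl hreach'
      have hdpp : pvDepth f pp ≤ pvDepth f x - 1 := by
        rw [hppf]
        by_cases hffx : f (f x) = f x
        · rw [hffx]
          have := pvGood_dec hg hx hfx'
          omega
        · have h1 := pvGood_dec hg (hg.1 x hx) hffx
          have h2 := pvGood_dec hg hx hfx'
          omega
      have hdx1 : 1 ≤ pvDepth f x := by
        have := pvGood_dec hg hx hfx'
        omega
      obtain ⟨h2, hkeys'', hg'', hroots''⟩ := ih par' pp hkeys' hg' hppS (by omega)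
      have hrootpp : pvRoot f pp = pvRoot f x := by
        rw [hppf]
        by_cases hffx : f (f x) = f x
        · rw [hffx, ← pvRoot_step (pvGood_reaches hg hx) hfx']
        · rw [← pvRoot_step (pvGood_reaches hg (hg.1 x hx)) hffx,
            ← pvRoot_step (pvGood_reaches hg hx) hfx']
      rw [hstep]
      refine ⟨?_, hkeys'', hg'', ?_⟩
      · rw [h2, hroots pp hppS, hrootpp]
      · intro y hy
        rw [hroots'' y hy, hroots y hy]

theorem pvStepB_spec {S : List String} (par : PySem.Dict String String) (a b : String)
    (hkeys : par.keys = S) (hg : pvGood S (pvPget par)) (ha : a ∈ S) (hb : b ∈ S) :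
    (pvStepB par (a, b)).keys = S ∧ pvGood S (pvPget (pvStepB par (a, b))) ∧
    ∀ y ∈ S, pvRoot (pvPget (pvStepB par (a, b))) y =
      if pvRoot (pvPget par) y = pvRoot (pvPget par) b then pvRoot (pvPget par) a
      else pvRoot (pvPget par) y := by
  set f := pvPget par with hf
  have hsize : par.size = S.length := by rw [← pvKeys_length, hkeys]
  have hfuel : ∀ x ∈ S, pvDepth f x < par.size + 1 := by
    intro x hx
    have := pvGood_depth_lt hg hx
    omega
  have hra : pvFindB (par.size + 1) par a = pvRoot f a :=
    pvFindB_eq hg _ a ha (hfuel a ha)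
  have hrb : pvFindB (par.size + 1) par b = pvRoot f b :=
    pvFindB_eq hg _ b hb (hfuel b hb)
  have hstep : pvStepB par (a, b) =
      if pvRoot f a ≠ pvRoot f b then par.insert (pvRoot f b) (pvRoot f a) else par := by
    unfold pvStepB
    rw [hra, hrb]
  rw [hstep]
  by_cases hne : pvRoot f a ≠ pvRoot f b
  · rw [if_pos hne]
    have hf' : ∀ y, pvPget (par.insert (pvRoot f b) (pvRoot f a)) y =
        if y = pvRoot f b then pvRoot f a else f y := by
      intro y; rw [pvPget_insert]
    obtain ⟨hg', hroots⟩ := pvUnionUpd hg (pvGood_root_mem hg ha) (pvGood_root_mem hg hb)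
      (pvRoot_fix (pvGood_reaches hg ha)) (pvRoot_fix (pvGood_reaches hg hb)) hne hf'
    refine ⟨?_, hg', hroots⟩
    rw [pvKeys_insert_of_mem par _ (hkeys ▸ pvGood_root_mem hg hb), hkeys]
  · rw [if_neg hne]
    push Not at hne
    refine ⟨hkeys, hg, ?_⟩
    intro y hy
    by_cases h : pvRoot f y = pvRoot f b
    · rw [if_pos h, h, ← hne]
    · rw [if_neg h]

theorem pvUnionA_spec {S : List String} (par : PySem.Dict String String) (a b : String)
    (hkeys : par.keys = S) (hg : pvGood S (pvPget par)) (ha : a ∈ S) (hb : b ∈ S) :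
    (pvUnionA par a b).keys = S ∧ pvGood S (pvPget (pvUnionA par a b)) ∧
    ∀ y ∈ S, pvRoot (pvPget (pvUnionA par a b)) y =
      if pvRoot (pvPget par) y = pvRoot (pvPget par) b then pvRoot (pvPget par) a
      else pvRoot (pvPget par) y := by
  have hsize : par.size = S.length := by rw [← pvKeys_length, hkeys]
  obtain ⟨h2a, hkeysa, hga, hrootsa⟩ := pvFindA_spec (par.size + 1) par a hkeys hg ha
    (by have := pvGood_depth_lt hg ha; omega)
  have hsizea : (pvFindA (par.size + 1) par a).1.size = S.length := by
    rw [← pvKeys_length, hkeysa]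
  obtain ⟨h2b, hkeysb, hgb, hrootsb⟩ :=
    pvFindA_spec ((pvFindA (par.size + 1) par a).1.size + 1)
      (pvFindA (par.size + 1) par a).1 b hkeysa hga hb
      (by have := pvGood_depth_lt hga hb; omega)
  have hrbf : (pvFindA ((pvFindA (par.size + 1) par a).1.size + 1)
      (pvFindA (par.size + 1) par a).1 b).2 = pvRoot (pvPget par) b := by
    rw [h2b, hrootsa b hb]
  have hrootsbf : ∀ y ∈ S,
      pvRoot (pvPget (pvFindA ((pvFindA (par.size + 1) par a).1.size + 1)
        (pvFindA (par.size + 1) par a).1 b).1) y = pvRoot (pvPget par) y := by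
    intro y hy
    rw [hrootsb y hy, hrootsa y hy]
  have hun : pvUnionA par a b =
      (if (pvFindA (par.size + 1) par a).2 ≠
          (pvFindA ((pvFindA (par.size + 1) par a).1.size + 1)
            (pvFindA (par.size + 1) par a).1 b).2 then
        (pvFindA ((pvFindA (par.size + 1) par a).1.size + 1)
            (pvFindA (par.size + 1) par a).1 b).1.insert
          (pvFindA ((pvFindA (par.size + 1) par a).1.size + 1)
            (pvFindA (par.size + 1) par a).1 b).2 (pvFindA (par.size + 1) par a).2
      else (pvFindA ((pvFindA (par.size + 1) par a).1.size + 1)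
          (pvFindA (par.size + 1) par a).1 b).1) := rfl
  rw [hun, h2a, hrbf]
  by_cases hne : pvRoot (pvPget par) a ≠ pvRoot (pvPget par) b
  · rw [if_pos hne]
    have hf' : ∀ y, pvPget ((pvFindA ((pvFindA (par.size + 1) par a).1.size + 1)
        (pvFindA (par.size + 1) par a).1 b).1.insert (pvRoot (pvPget par) b)
          (pvRoot (pvPget par) a)) y =
        if y = pvRoot (pvPget par) b then pvRoot (pvPget par) a
        else pvPget (pvFindA ((pvFindA (par.size + 1) par a).1.size + 1)
          (pvFindA (par.size + 1) par a).1 b).1 y := by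
      intro y; rw [pvPget_insert]
    have hraS : pvRoot (pvPget par) a ∈ S := pvGood_root_mem hg ha
    have hrbS : pvRoot (pvPget par) b ∈ S := pvGood_root_mem hg hb
    have hfixra : pvPget (pvFindA ((pvFindA (par.size + 1) par a).1.size + 1)
        (pvFindA (par.size + 1) par a).1 b).1 (pvRoot (pvPget par) a) =
        pvRoot (pvPget par) a := by
      have h := hrootsbf a ha
      rw [← h]
      exact pvRoot_fix (pvGood_reaches hgb ha)
    have hfixrb : pvPget (pvFindA ((pvFindA (par.size + 1) par a).1.size + 1)
        (pvFindA (par.size + 1) par a).1 b).1 (pvRoot (pvPget par) b) =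
        pvRoot (pvPget par) b := by
      have h := hrootsbf b hb
      rw [← h]
      exact pvRoot_fix (pvGood_reaches hgb hb)
    obtain ⟨hg', hroots⟩ := pvUnionUpd hgb hraS hrbS hfixra hfixrb hne hf'
    refine ⟨?_, hg', ?_⟩
    · rw [pvKeys_insert_of_mem _ _ (hkeysb ▸ hrbS), hkeysb]
    · intro y hy
      rw [hroots y hy, hrootsbf y hy]
  · rw [if_neg hne]
    push Not at hne
    refine ⟨hkeysb, hgb, ?_⟩
    intro y hy
    rw [hrootsbf y hy]
    by_cases h : pvRoot (pvPget par) y = pvRoot (pvPget par) b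
    · rw [if_pos h, h, ← hne]
    · rw [if_neg h]

def pvKer (E : List (String × String)) (y z : String) : Prop :=
  Relation.EqvGen (fun u v => (u, v) ∈ E) y z

theorem pvKer_nil {y z : String} : pvKer [] y z ↔ y = z := by
  constructor
  · intro h
    induction h with
    | rel _ _ h => simp at h
    | refl => rfl
    | symm _ _ _ ih => exact ih.symm
    | trans _ _ _ _ _ ih1 ih2 => exact ih1.trans ih2
  · intro h; rw [h]; exact Relation.EqvGen.refl z

theorem pvKer_mono {E E' : List (String × String)}
    (h : ∀ u v, (u, v) ∈ E → pvKer E' u v) {y z : String} (hk : pvKer E y z) :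
    pvKer E' y z := by
  induction hk with
  | rel u v huv => exact h u v huv
  | refl x => exact Relation.EqvGen.refl x
  | symm _ _ _ ih => exact Relation.EqvGen.symm _ _ ih
  | trans _ _ _ _ _ ih1 ih2 => exact Relation.EqvGen.trans _ _ _ ih1 ih2

theorem pvKer_append {E : List (String × String)} {a b y z : String} :
    pvKer (E ++ [(a, b)]) y z ↔
      pvKer E y z ∨ (pvKer E y a ∧ pvKer E b z) ∨ (pvKer E y b ∧ pvKer E a z) := by
  constructor
  · intro h
    induction h with
    | rel u v huv =>
      rcases List.mem_append.mp huv with h' | h'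
      · exact Or.inl (Relation.EqvGen.rel u v h')
      · simp at h'
        exact Or.inr (Or.inl ⟨h'.1 ▸ Relation.EqvGen.refl u,
          h'.2 ▸ Relation.EqvGen.refl v⟩)
    | refl x => exact Or.inl (Relation.EqvGen.refl x)
    | symm x y _ ih =>
      rcases ih with h' | ⟨h1, h2⟩ | ⟨h1, h2⟩
      · exact Or.inl (Relation.EqvGen.symm _ _ h')
      · exact Or.inr (Or.inr ⟨Relation.EqvGen.symm _ _ h2, Relation.EqvGen.symm _ _ h1⟩)
      · exact Or.inr (Or.inl ⟨Relation.EqvGen.symm _ _ h2, Relation.EqvGen.symm _ _ h1⟩)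
    | trans x y z _ _ ih1 ih2 =>
      rcases ih1 with h1 | ⟨h1a, h1b⟩ | ⟨h1a, h1b⟩ <;>
        rcases ih2 with h2 | ⟨h2a, h2b⟩ | ⟨h2a, h2b⟩
      · exact Or.inl (Relation.EqvGen.trans _ _ _ h1 h2)
      · exact Or.inr (Or.inl ⟨Relation.EqvGen.trans _ _ _ h1 h2a, h2b⟩)
      · exact Or.inr (Or.inr ⟨Relation.EqvGen.trans _ _ _ h1 h2a, h2b⟩)
      · exact Or.inr (Or.inl ⟨h1a, Relation.EqvGen.trans _ _ _ h1b h2⟩)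
      · exact Or.inl (Relation.EqvGen.trans _ _ _ h1a (Relation.EqvGen.trans _ _ _
          (Relation.EqvGen.symm _ _ h2a) (Relation.EqvGen.trans _ _ _
            (Relation.EqvGen.symm _ _ h1b) h2b)))
      · exact Or.inl (Relation.EqvGen.trans _ _ _ h1a h2b)
      · exact Or.inr (Or.inr ⟨h1a, Relation.EqvGen.trans _ _ _ h1b h2⟩)
      · exact Or.inl (Relation.EqvGen.trans _ _ _ h1a h2b)
      · exact Or.inl (Relation.EqvGen.trans _ _ _ h1a (Relation.EqvGen.trans _ _ _
          (Relation.EqvGen.symm _ _ h2a) (Relation.EqvGen.trans _ _ _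
            (Relation.EqvGen.symm _ _ h1b) h2b)))
  · intro h
    have hsub : ∀ u v, (u, v) ∈ E → pvKer (E ++ [(a, b)]) u v := by
      intro u v huv
      exact Relation.EqvGen.rel u v (List.mem_append.mpr (Or.inl huv))
    have hab : pvKer (E ++ [(a, b)]) a b :=
      Relation.EqvGen.rel a b (List.mem_append.mpr (Or.inr (by simp)))
    rcases h with h' | ⟨h1, h2⟩ | ⟨h1, h2⟩
    · exact pvKer_mono hsub h'
    · exact Relation.EqvGen.trans _ _ _ (pvKer_mono hsub h1)
        (Relation.EqvGen.trans _ _ _ hab (pvKer_mono hsub h2))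
    · exact Relation.EqvGen.trans _ _ _ (pvKer_mono hsub h1)
        (Relation.EqvGen.trans _ _ _ (Relation.EqvGen.symm _ _ hab) (pvKer_mono hsub h2))

theorem pvKerShape (Ry Rz Ra Rb : String) :
    ((if Ry = Rb then Ra else Ry) = (if Rz = Rb then Ra else Rz)) ↔
      (Ry = Rz ∨ (Ry = Ra ∧ Rz = Rb) ∨ (Ry = Rb ∧ Rz = Ra)) := by
  constructor
  · intro h
    split_ifs at h with h1 h2 h2
    · exact Or.inl (h1.trans h2.symm)
    · exact Or.inr (Or.inr ⟨h1, h.symm⟩)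
    · exact Or.inr (Or.inl ⟨h, h2⟩)
    · exact Or.inl h
  · rintro (h | ⟨hya, hzb⟩ | ⟨hyb, hza⟩)
    · split_ifs with h1 h2 h2
      · rfl
      · exact absurd (h.symm.trans h1) h2
      · exact absurd (h.trans h2) h1
      · exact h
    · rw [if_pos hzb]
      by_cases h1 : Ry = Rb
      · rw [if_pos h1]
      · rw [if_neg h1]; exact hya
    · rw [if_pos hyb]
      by_cases h2 : Rz = Rb
      · rw [if_pos h2]
      · rw [if_neg h2]; exact hza.symm

theorem pvProc {S : List String} (hnd : S.Nodup)
    (step : PySem.Dict String String → String → String → PySem.Dict String String)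
    (hstep : ∀ par a b, par.keys = S → pvGood S (pvPget par) → a ∈ S → b ∈ S →
      (step par a b).keys = S ∧ pvGood S (pvPget (step par a b)) ∧
      ∀ y ∈ S, pvRoot (pvPget (step par a b)) y =
        if pvRoot (pvPget par) y = pvRoot (pvPget par) b then pvRoot (pvPget par) a
        else pvRoot (pvPget par) y) :
    ∀ (E : List (String × String)), (∀ e ∈ E, e.1 ∈ S ∧ e.2 ∈ S) →
      (E.foldl (fun par e => step par e.1 e.2)
          (S.foldl (fun d p => d.insert p p) PySem.Dict.empty)).keys = S ∧
      pvGood S (pvPget (E.foldl (fun par e => step par e.1 e.2)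
          (S.foldl (fun d p => d.insert p p) PySem.Dict.empty))) ∧
      ∀ y ∈ S, ∀ z ∈ S,
        (pvRoot (pvPget (E.foldl (fun par e => step par e.1 e.2)
            (S.foldl (fun d p => d.insert p p) PySem.Dict.empty))) y =
         pvRoot (pvPget (E.foldl (fun par e => step par e.1 e.2)
            (S.foldl (fun d p => d.insert p p) PySem.Dict.empty))) z ↔ pvKer E y z) := by
  intro E
  induction E using List.reverseRecOn with
  | nil =>
    intro _
    refine ⟨pvPar0_keys hnd, ?_, ?_⟩
    · have : pvPget (S.foldl (fun d p => d.insert p p) PySem.Dict.empty) = fun x => x := by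
        funext x; exact pvPar0_pget hnd x
      rw [List.foldl_nil, this]
      exact pvGood_id S
    · intro y _ z _
      have hid : pvPget (S.foldl (fun d p => d.insert p p) PySem.Dict.empty) = fun x => x := by
        funext x; exact pvPar0_pget hnd x
      rw [List.foldl_nil, hid, pvKer_nil]
      rw [pvRoot_of_fix rfl, pvRoot_of_fix rfl]
  | append_singleton E e ih =>
    intro hE
    have hE' : ∀ e' ∈ E, e'.1 ∈ S ∧ e'.2 ∈ S := by
      intro e' he'; exact hE e' (List.mem_append.mpr (Or.inl he'))
    have heS := hE e (List.mem_append.mpr (Or.inr (by simp)))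
    obtain ⟨hkeys, hg, hker⟩ := ih hE'
    rw [List.foldl_append]
    simp only [List.foldl_cons, List.foldl_nil]
    obtain ⟨hkeys', hg', hroots'⟩ := hstep _ e.1 e.2 hkeys hg heS.1 heS.2
    refine ⟨hkeys', hg', ?_⟩
    intro y hy z hz
    rw [hroots' y hy, hroots' z hz]
    have hab : (e.1, e.2) = e := rfl
    rw [pvKerShape]
    constructor
    · intro h
      rcases h with h | ⟨h1, h2⟩ | ⟨h1, h2⟩
      · exact pvKer_append.mpr (Or.inl ((hker y hy z hz).mp h))
      · refine pvKer_append.mpr (Or.inr (Or.inl ⟨(hker y hy e.1 heS.1).mp h1, ?_⟩))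
        exact Relation.EqvGen.symm _ _ ((hker z hz e.2 heS.2).mp h2)
      · refine pvKer_append.mpr (Or.inr (Or.inr ⟨(hker y hy e.2 heS.2).mp h1, ?_⟩))
        exact Relation.EqvGen.symm _ _ ((hker z hz e.1 heS.1).mp h2)
    · intro h
      have h' := pvKer_append.mp (show pvKer (E ++ [(e.1, e.2)]) y z by rw [hab]; exact h)
      rcases h' with h' | ⟨h1, h2⟩ | ⟨h1, h2⟩
      · exact Or.inl ((hker y hy z hz).mpr h')
      · exact Or.inr (Or.inl ⟨(hker y hy e.1 heS.1).mpr h1,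
          (hker z hz e.2 heS.2).mpr (Relation.EqvGen.symm _ _ h2)⟩)
      · exact Or.inr (Or.inr ⟨(hker y hy e.2 heS.2).mpr h1,
          (hker z hz e.1 heS.1).mpr (Relation.EqvGen.symm _ _ h2)⟩)

-- all ordered overlapping pairs (a, b), a before b, as produced by A's double loop
def pvPairList (ov : String → String → Bool) : List String → List (String × String)
  | [] => []
  | a :: t => (t.filter (fun b => ov a b)).map (fun b => (a, b)) ++ pvPairList ov t

theorem pvFoldlIf {α : Type} (l : List String) (g : α → String → α) (d : String → Bool)
    (s0 : α) :
    l.foldl (fun s x => if d x then s else g s x) s0 =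
      (l.filter (fun x => !d x)).foldl g s0 := by
  induction l generalizing s0 with
  | nil => rfl
  | cons x t ih =>
    by_cases hx : d x
    · simp [hx, ih]
    · simp [hx, ih]

theorem pvEnumerate_cons (a : String) (t : List String) (k : Int) :
    PySem.List.enumerate (a :: t) k = (k, a) :: PySem.List.enumerate t (k + 1) := rfl

theorem pvALoopFlatten (present : List String) (σ : String → List String) :
    ∀ (rest : List String) (k : Nat) (par : PySem.Dict String String),
      rest = present.drop k →
      (PySem.List.enumerate rest k).foldl (fun par ia =>
          (PySem.List.slice present (some (ia.1 + 1)) none).foldl (fun par b =>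
            if PySem.Set.isdisjoint (σ ia.2) (σ b) then par else pvUnionA par ia.2 b) par) par =
        (pvPairList (fun a b => !PySem.Set.isdisjoint (σ a) (σ b)) rest).foldl
          (fun par e => pvUnionA par e.1 e.2) par := by
  intro rest
  induction rest with
  | nil => intro k par _; rfl
  | cons a t ih =>
    intro k par hrest
    rw [pvEnumerate_cons, List.foldl_cons]
    have ht : t = present.drop (k + 1) := by
      have := congrArg (List.drop 1) hrest
      simpa [List.drop_drop] using this
    have hslice : PySem.List.slice present (some ((k : Int) + 1)) none =
        present.drop (k + 1) := by
      rw [PySem.List.slice_from present (a := (k : Int) + 1) (by omega)]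
      have h' : ((k : Int) + 1).toNat = k + 1 := by omega
      rw [h']
    have hinner : ∀ par', (PySem.List.slice present (some ((k : Int) + 1)) none).foldl
        (fun par b => if PySem.Set.isdisjoint (σ a) (σ b) then par else pvUnionA par a b) par' =
        ((t.filter (fun b => !PySem.Set.isdisjoint (σ a) (σ b))).map (fun b => (a, b))).foldl
          (fun par e => pvUnionA par e.1 e.2) par' := by
      intro par'
      rw [hslice, ← ht, pvFoldlIf, List.foldl_map]
    show (PySem.List.enumerate t (↑k + 1)).foldl _ _ = _
    have hk1 : (k : Int) + 1 = ((k + 1 : Nat) : Int) := by push_cast; ring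
    rw [hinner par, pvPairList, List.foldl_append, hk1]
    exact ih (k + 1) _ ht

theorem pvZipAdj {u v : String} :
    ∀ (l : List String), (u, v) ∈ l.zip l.tail → [u, v].Sublist l := by
  intro l
  induction l with
  | nil => intro h; simp at h
  | cons x t ih =>
    intro h
    cases t with
    | nil => simp at h
    | cons y t' =>
      rw [show (x :: y :: t').tail = y :: t' from rfl, List.zip_cons_cons] at h
      rcases List.mem_cons.mp h with h | h
      · have h1 : u = x := congrArg Prod.fst h
        have h2 : v = y := congrArg Prod.snd h
        subst h1; subst h2
        exact List.Sublist.cons₂ _ (List.Sublist.cons₂ _ (List.nil_sublist t'))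
      · exact List.Sublist.cons _ (ih (by simpa using h))

theorem pvSublistSplit {u v : String} :
    ∀ (l : List String), [u, v].Sublist l → ∃ l1 l2, l = l1 ++ u :: l2 ∧ v ∈ l2 := by
  intro l
  induction l with
  | nil => intro h; simp at h
  | cons x t ih =>
    intro h
    cases h with
    | cons _ h' =>
      obtain ⟨l1, l2, rfl, hv⟩ := ih h'
      exact ⟨x :: l1, l2, rfl, hv⟩
    | cons₂ _ h' =>
      exact ⟨[], t, rfl, h'.subset (by simp)⟩

theorem pvPairList_of_split (ov : String → String → Bool) {u v : String} :
    ∀ (l1 l2 : List String), ov u v = true → v ∈ l2 →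
      (u, v) ∈ pvPairList ov (l1 ++ u :: l2) := by
  intro l1
  induction l1 with
  | nil =>
    intro l2 hov hv
    simp only [List.nil_append, pvPairList]
    apply List.mem_append.mpr
    left
    exact List.mem_map.mpr ⟨v, List.mem_filter.mpr ⟨hv, hov⟩, rfl⟩
  | cons x t ih =>
    intro l2 hov hv
    simp only [List.cons_append, pvPairList]
    exact List.mem_append.mpr (Or.inr (ih l2 hov hv))

theorem pvPairList_mem (ov : String → String → Bool) {e : String × String} :
    ∀ (l : List String), e ∈ pvPairList ov l →
      e.1 ∈ l ∧ e.2 ∈ l ∧ ov e.1 e.2 = true := by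
  intro l
  induction l with
  | nil => intro h; simp [pvPairList] at h
  | cons a t ih =>
    intro h
    rw [pvPairList] at h
    rcases List.mem_append.mp h with h | h
    · obtain ⟨b, hb, rfl⟩ := List.mem_map.mp h
      have := List.mem_filter.mp hb
      exact ⟨by simp, by simp [this.1], this.2⟩
    · obtain ⟨h1, h2, h3⟩ := ih h
      exact ⟨by simp [h1], by simp [h2], h3⟩

theorem pvChainConn (E : List (String × String)) :
    ∀ (ps : List String), (∀ pr ∈ ps.zip ps.tail, pr ∈ E) →
      ∀ u ∈ ps, ∀ v ∈ ps, pvKer E u v := by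
  intro ps
  induction ps with
  | nil => intro _ u hu; simp at hu
  | cons x t ih =>
    intro hzip
    have haux : ∀ w ∈ x :: t, pvKer E x w := by
      cases t with
      | nil =>
        intro w hw
        have hw' : w = x := by simpa using hw
        subst hw'
        exact Relation.EqvGen.refl w
      | cons y t' =>
        have hedge : (x, y) ∈ E := hzip (x, y) (by simp [List.zip_cons_cons])
        have ht : ∀ pr ∈ (y :: t').zip (y :: t').tail, pr ∈ E := by
          intro pr hpr
          apply hzip
          simp only [List.tail_cons, List.zip_cons_cons]
          exact List.mem_cons.mpr (Or.inr hpr)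
        have hconn := ih ht
        intro w hw
        rcases List.mem_cons.mp hw with rfl | hw
        · exact Relation.EqvGen.refl w
        · exact Relation.EqvGen.trans _ _ _ (Relation.EqvGen.rel _ _ hedge)
            (hconn y (by simp) w hw)
    intro u hu v hv
    exact Relation.EqvGen.trans _ _ _ (Relation.EqvGen.symm _ _ (haux u hu)) (haux v hv)

theorem pvFoldlFlatMap {α β γ : Type} (l : List α) (f : α → List β) (g : γ → β → γ)
    (s0 : γ) :
    (l.flatMap f).foldl g s0 = l.foldl (fun s x => (f x).foldl g s) s0 := by
  induction l generalizing s0 with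
  | nil => rfl
  | cons x t ih => simp [List.flatMap_cons, List.foldl_append, ih]

theorem pvBLoopFlatten (values : List (List String)) (par0 : PySem.Dict String String) :
    values.foldl (fun par ps => (ps.zip (PySem.List.slice ps (some 1) none)).foldl
      pvStepB par) par0 =
    (values.flatMap (fun ps => ps.zip ps.tail)).foldl
      (fun par e => pvStepB par (e.1, e.2)) par0 := by
  rw [pvFoldlFlatMap]
  apply PySem.List.foldl_congr_mem
  intro par ps _
  have hs : PySem.List.slice ps (some 1) none = ps.tail := by
    rw [PySem.List.slice_from ps (a := 1) (by omega)]
    simp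
  rw [hs]

-- ----- comps stage: both folds compute blocks of the root kernel -----

theorem pvCompsA {S : List String} :
    ∀ (l : List String), (∀ p ∈ l, p ∈ S) →
    ∀ (par : PySem.Dict String String) (c : PySem.Dict String (PySem.Set String)),
      par.keys = S → pvGood S (pvPget par) →
      (l.foldl (fun st p =>
        ((pvFindA (st.1.size + 1) st.1 p).1,
          st.2.modify (pvFindA (st.1.size + 1) st.1 p).2 PySem.Set.empty
            (fun s => PySem.Set.add s p)))
        (par, c)).2 =
      l.foldl (fun c p => c.modify (pvRoot (pvPget par) p) PySem.Set.empty
        (fun s => PySem.Set.add s p)) c := by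
  intro l
  induction l with
  | nil => intro _ par c _ _; rfl
  | cons p t ih =>
    intro hl par c hkeys hg
    have hpS : p ∈ S := hl p (by simp)
    have hsize : par.size = S.length := by rw [← pvKeys_length, hkeys]
    obtain ⟨h2, hkeys', hg', hroots'⟩ := pvFindA_spec (par.size + 1) par p hkeys hg hpS
      (by have := pvGood_depth_lt hg hpS; omega)
    rw [List.foldl_cons, List.foldl_cons]
    have hstep : ((pvFindA (par.size + 1) par p).1,
          c.modify (pvFindA (par.size + 1) par p).2 PySem.Set.empty
            (fun s => PySem.Set.add s p)) =
        ((pvFindA (par.size + 1) par p).1,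
          c.modify (pvRoot (pvPget par) p) PySem.Set.empty (fun s => PySem.Set.add s p)) := by
      rw [h2]
    rw [hstep]
    rw [ih (fun q hq => hl q (by simp [hq])) _ _ hkeys' hg']
    apply PySem.List.foldl_congr_mem
    intro acc q hq
    rw [hroots' q (hl q (by simp [hq]))]

theorem pvCompsB {S : List String} (par : PySem.Dict String String)
    (hkeys : par.keys = S) (hg : pvGood S (pvPget par)) :
    ∀ (l : List String), (∀ p ∈ l, p ∈ S) →
    ∀ (c : PySem.Dict String (PySem.Set String)),
      l.foldl (fun c p => c.modify (pvFindB (par.size + 1) par p) PySem.Set.empty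
        (fun s => PySem.Set.add s p)) c =
      l.foldl (fun c p => c.modify (pvRoot (pvPget par) p) PySem.Set.empty
        (fun s => PySem.Set.add s p)) c := by
  intro l hl c
  apply PySem.List.foldl_congr_mem
  intro acc q hq
  have hsize : par.size = S.length := by rw [← pvKeys_length, hkeys]
  rw [pvFindB_eq hg _ q (hl q hq)
    (by have := pvGood_depth_lt hg (hl q hq); omega)]

-- ----- representatives (first occurrence of each kernel class) -----

def pvRepsAux (R : String → String) (acc : List String) (l : List String) : List String :=
  l.foldl (fun acc p => if (acc.map R).contains (R p) then acc else acc ++ [p]) acc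

theorem pvRepsAux_append (R : String → String) (acc l : List String) (p : String) :
    pvRepsAux R acc (l ++ [p]) =
      (if ((pvRepsAux R acc l).map R).contains (R p) then pvRepsAux R acc l
       else pvRepsAux R acc l ++ [p]) := by
  simp [pvRepsAux, List.foldl_append]

theorem pvRepsAux_map (R : String → String) :
    ∀ (l acc : List String),
      (pvRepsAux R acc l).map R = PySem.Set.update (acc.map R) (l.map R) := by
  intro l
  induction l with
  | nil => intro acc; rfl
  | cons p t ih =>
    intro acc
    show (pvRepsAux R (if (acc.map R).contains (R p) then acc else acc ++ [p]) t).map R = _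
    rw [ih]
    show _ = PySem.Set.update (PySem.Set.add (acc.map R) (R p)) (t.map R)
    congr 1
    rw [PySem.Set.add]
    by_cases h : (acc.map R).contains (R p)
    · rw [if_pos h, if_pos (show PySem.Set.contains (List.map R acc) (R p) = true from h)]
    · rw [if_neg h, if_neg (show ¬ PySem.Set.contains (List.map R acc) (R p) = true from h)]
      simp

theorem pvRepsAux_subset (R : String → String) :
    ∀ (l acc : List String), ∀ q ∈ pvRepsAux R acc l, q ∈ acc ∨ q ∈ l := by
  intro l
  induction l with
  | nil => intro acc q hq; exact Or.inl hq
  | cons p t ih =>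
    intro acc q hq
    show q ∈ acc ∨ q ∈ p :: t
    have hq' : q ∈ (if (acc.map R).contains (R p) then acc else acc ++ [p]) ∨ q ∈ t :=
      ih _ q hq
    rcases hq' with hq' | hq'
    · by_cases h : (acc.map R).contains (R p)
      · rw [if_pos h] at hq'; exact Or.inl hq'
      · rw [if_neg h] at hq'
        rcases List.mem_append.mp hq' with h' | h'
        · exact Or.inl h'
        · exact Or.inr (by simp at h'; simp [h'])
    · exact Or.inr (by simp [hq'])

theorem pvRepsAux_congr {L : List String} {R1 R2 : String → String}
    (hker : ∀ p ∈ L, ∀ q ∈ L, (R1 p = R1 q ↔ R2 p = R2 q)) :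
    ∀ (l acc : List String), (∀ p ∈ l, p ∈ L) → (∀ p ∈ acc, p ∈ L) →
      pvRepsAux R1 acc l = pvRepsAux R2 acc l := by
  intro l
  induction l with
  | nil => intro acc _ _; rfl
  | cons p t ih =>
    intro acc hl hacc
    have hpL : p ∈ L := hl p (by simp)
    have hcond : (acc.map R1).contains (R1 p) = (acc.map R2).contains (R2 p) := by
      rw [List.contains_eq_mem, List.contains_eq_mem]
      apply decide_eq_decide.mpr
      constructor
      · intro h
        obtain ⟨a, ha, haeq⟩ := List.mem_map.mp h
        exact List.mem_map.mpr ⟨a, ha, (hker a (hacc a ha) p hpL).mp haeq⟩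
      · intro h
        obtain ⟨a, ha, haeq⟩ := List.mem_map.mp h
        exact List.mem_map.mpr ⟨a, ha, (hker a (hacc a ha) p hpL).mpr haeq⟩
    show pvRepsAux R1 (if (acc.map R1).contains (R1 p) then acc else acc ++ [p]) t = _
    rw [hcond]
    have hacc' : ∀ q ∈ (if (acc.map R2).contains (R2 p) then acc else acc ++ [p]), q ∈ L := by
      intro q hq
      split at hq
      · exact hacc q hq
      · rcases List.mem_append.mp hq with h' | h'
        · exact hacc q h'
        · simp at h'; rw [h']; exact hpL
    exact ih _ (fun q hq => hl q (by simp [hq])) hacc'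

-- ----- the comps dict, characterised -----

theorem pvGroupsItems (R : String → String) :
    ∀ (l : List String), l.Nodup →
      (l.foldl (fun c p => c.modify (R p) PySem.Set.empty (fun s => PySem.Set.add s p))
        PySem.Dict.empty).items =
      (pvRepsAux R [] l).map (fun q => (R q, l.filter (fun p => R p == R q))) := by
  intro l
  induction l using List.reverseRecOn with
  | nil => intro _; rfl
  | append_singleton l p ih =>
    intro hnd
    have hndl : l.Nodup := hnd.sublist (by simp)
    have hpl : p ∉ l := by
      have h := (List.nodup_append.mp hnd).2.2
      intro hc
      exact h p hc p (List.mem_singleton_self p) rfl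
    rw [List.foldl_append, List.foldl_cons, List.foldl_nil, pvRepsAux_append]
    set D := (l.foldl (fun c p => c.modify (R p) PySem.Set.empty (fun s => PySem.Set.add s p))
        PySem.Dict.empty) with hD
    have hitems : D.items = (pvRepsAux R [] l).map
        (fun q => (R q, l.filter (fun p => R p == R q))) := ih hndl
    have hkeysD : D.keys = (pvRepsAux R [] l).map R := by
      rw [PySem.Dict.keys, hitems, List.map_map]
      rfl
    have hmapnd : ((pvRepsAux R [] l).map R).Nodup := by
      rw [pvRepsAux_map]
      exact PySem.Set.nodup_ofList _
    have hkeysnd : D.keys.Nodup := by rw [hkeysD]; exact hmapnd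
    have hcont : D.contains (R p) = ((pvRepsAux R [] l).map R).contains (R p) := by
      rw [PySem.Dict.contains_eq_decide_mem_keys, hkeysD, List.contains_eq_mem]
    by_cases hc : ((pvRepsAux R [] l).map R).contains (R p) = true
    · rw [if_pos hc]
      have hex : ∃ q0, q0 ∈ pvRepsAux R [] l ∧ R q0 = R p := by
        have h' := hc
        rw [List.contains_eq_mem, decide_eq_true_eq] at h'
        obtain ⟨q0, hq0, hq0eq⟩ := List.mem_map.mp h'
        exact ⟨q0, hq0, hq0eq⟩
      obtain ⟨q0, hq0, hq0eq⟩ := hex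
      have hget : D.get? (R p) = some (l.filter (fun x => R x == R q0)) := by
        have hmem : (R p, l.filter (fun x => R x == R q0)) ∈ D.items := by
          rw [hitems]
          refine List.mem_map.mpr ⟨q0, hq0, ?_⟩
          rw [hq0eq]
        exact PySem.Dict.get?_of_mem_items D hmem hkeysnd
      show (D.modify (R p) PySem.Set.empty (fun s => PySem.Set.add s p)).items = _
      rw [PySem.Dict.modify]
      have hgetD : D.getD (R p) PySem.Set.empty = l.filter (fun x => R x == R q0) := by
        rw [PySem.Dict.getD, hget]
        rfl
      rw [hgetD]
      have haddp : PySem.Set.add (l.filter (fun x => R x == R q0)) p =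
          l.filter (fun x => R x == R q0) ++ [p] := by
        apply PySem.Set.add_of_not_mem
        intro hmem
        exact hpl (List.mem_of_mem_filter hmem)
      rw [haddp]
      rw [PySem.Dict.items_insert_of_contains D _ (by rw [hcont]; exact hc)]
      rw [hitems, List.map_map]
      apply List.map_congr_left
      intro q hq
      simp only [Function.comp]
      by_cases hqp : R q = R p
      · have hcnd : (((R q, l.filter (fun x => R x == R q)).1 == R p)) = true := by
          simp only [beq_iff_eq]
          exact hqp
        rw [if_pos hcnd]
        have hqq0 : q = q0 :=
          List.inj_on_of_nodup_map hmapnd hq hq0 (by rw [hqp, hq0eq])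
        rw [Prod.mk.injEq]
        refine ⟨hqp.symm, ?_⟩
        rw [List.filter_append]
        have hfp : List.filter (fun x => R x == R q) [p] = [p] := by
          simp [hqp.symm]
        rw [hfp, hqq0]
      · have hcnd : ¬ (((R q, l.filter (fun x => R x == R q)).1 == R p) = true) := by
          simp only [beq_iff_eq]
          exact hqp
        rw [if_neg hcnd]
        rw [Prod.mk.injEq]
        refine ⟨rfl, ?_⟩
        rw [List.filter_append]
        have hfp : List.filter (fun x => R x == R q) [p] = [] := by
          simp only [List.filter_cons, List.filter_nil]
          rw [if_neg]
          simp only [beq_iff_eq]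
          intro hcontra
          exact hqp hcontra.symm
        rw [hfp, List.append_nil]
    · rw [if_neg hc]
      have hnotin : R p ∉ (pvRepsAux R [] l).map R := by
        intro hmem
        exact hc (by rw [List.contains_eq_mem, decide_eq_true_eq]; exact hmem)
      show (D.modify (R p) PySem.Set.empty (fun s => PySem.Set.add s p)).items = _
      rw [PySem.Dict.modify]
      have hgetD : D.getD (R p) PySem.Set.empty = PySem.Set.empty := by
        rw [PySem.Dict.getD]
        have h0 : D.get? (R p) = none := by
          rw [PySem.Dict.get?_eq_none_iff_contains, hcont]
          exact Bool.not_eq_true _ ▸ (by simpa using hc)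
        rw [h0]
        rfl
      rw [hgetD]
      rw [PySem.Dict.items_insert_of_not_contains D _ (by rw [hcont]; simpa using hc)]
      rw [hitems, List.map_append]
      congr 1
      · apply List.map_congr_left
        intro q hq
        rw [Prod.mk.injEq]
        refine ⟨rfl, ?_⟩
        have hqne : R p ≠ R q := by
          intro hcontra
          exact hnotin (hcontra ▸ List.mem_map.mpr ⟨q, hq, rfl⟩)
        rw [List.filter_append]
        have hfp : List.filter (fun x => R x == R q) [p] = [] := by
          simp only [List.filter_cons, List.filter_nil]
          rw [if_neg]
          simp only [beq_iff_eq]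
          intro hcontra
          exact hqne hcontra
        rw [hfp, List.append_nil]
      · simp only [List.map_cons, List.map_nil]
        have haddE : PySem.Set.add PySem.Set.empty p = [p] := rfl
        rw [haddE]
        have hfl : l.filter (fun x => R x == R p) = [] := by
          rw [List.filter_eq_nil_iff]
          intro x hx
          simp only [beq_iff_eq]
          intro hcontra
          apply hnotin
          rw [← hcontra, pvRepsAux_map]
          show R x ∈ PySem.Set.ofList (l.map R)
          exact (PySem.Set.mem_ofList _ _).mpr (List.mem_map.mpr ⟨x, hx, rfl⟩)
        rw [List.filter_append, hfl, List.nil_append]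
        have hfp : List.filter (fun x => R x == R p) [p] = [p] := by simp
        rw [hfp]

-- ----- head of the stable sort = Python's min (first minimum) -----

theorem pvInsertBy_cons {α : Type} (before : α → α → Bool) (x y : α) (ys : List α) :
    PySem.List.insertBy before x (y :: ys) =
      (if before x y then x :: y :: ys else y :: PySem.List.insertBy before x ys) := rfl

theorem pvSortHead {α : Type} (before : α → α → Bool) (d : α) :
    ∀ (gs : List α) (y : α) (ys : List α),
      ((gs.foldl (fun acc x => PySem.List.insertBy before x acc) (y :: ys)).headD d) =
        gs.foldl (fun b g => if before g b then g else b) y := by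
  intro gs
  induction gs with
  | nil => intro y ys; rfl
  | cons g gs ih =>
    intro y ys
    rw [List.foldl_cons, List.foldl_cons, pvInsertBy_cons]
    by_cases h : before g y
    · rw [if_pos h, if_pos h]
      exact ih g (y :: ys)
    · rw [if_neg h, if_neg h]
      exact ih y (PySem.List.insertBy before g ys)

theorem pvSorted2Head {κ₂ : Type} [LT κ₂] [DecidableLT κ₂]
    (k1 : PySem.Set String → Int) (k2 : PySem.Set String → κ₂) (d : PySem.Set String)
    (g0 : PySem.Set String) (gs : List (PySem.Set String)) :
    (PySem.List.sorted2 (g0 :: gs) k1 k2).headD d =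
      gs.foldl (fun b g =>
        if (decide (k1 g < k1 b) || (!decide (k1 b < k1 g) && decide (k2 g < k2 b))) then g
        else b) g0 := by
  show ((g0 :: gs).foldl (fun acc x => PySem.List.insertBy _ x acc) []).headD d = _
  rw [List.foldl_cons]
  exact pvSortHead _ d gs g0 []

-- ----- Set.inter fold membership / nodup -----

theorem pvInterMem (σ : String → List String) :
    ∀ (ps : List String) (s0 : List String) (c : String),
      (c ∈ ps.foldl (fun acc q => PySem.Set.inter acc (σ q)) s0 ↔
        c ∈ s0 ∧ ∀ q ∈ ps, c ∈ σ q) := by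
  intro ps
  induction ps with
  | nil => intro s0 c; simp
  | cons q ps ih =>
    intro s0 c
    rw [List.foldl_cons, ih]
    simp only [PySem.Set.inter, List.mem_filter, PySem.Set.contains_iff]
    constructor
    · rintro ⟨⟨h1, h2⟩, h3⟩
      exact ⟨h1, fun q' hq' => by
        rcases List.mem_cons.mp hq' with rfl | hq'
        · exact h2
        · exact h3 q' hq'⟩
    · rintro ⟨h1, h2⟩
      exact ⟨⟨h1, h2 q (by simp)⟩, fun q' hq' => h2 q' (by simp [hq'])⟩

theorem pvInterNodup (σ : String → List String) :
    ∀ (ps : List String) (s0 : List String), s0.Nodup →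
      (ps.foldl (fun acc q => PySem.Set.inter acc (σ q)) s0).Nodup := by
  intro ps
  induction ps with
  | nil => intro s0 h; exact h
  | cons q ps ih =>
    intro s0 h
    rw [List.foldl_cons]
    exact ih _ (h.filter _)

-- ----- filter of a duplicate-free list by == c -----

theorem pvFilterBeq :
    ∀ (l : List String) (c : String), l.Nodup →
      l.filter (fun x => x == c) = (if c ∈ l then [c] else []) := by
  intro l
  induction l with
  | nil => intro c _; simp
  | cons x t ih =>
    intro c hnd
    rw [List.filter_cons]
    by_cases hx : x = c
    · subst hx
      rw [if_pos (by simp), if_pos (by simp)]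
      have : t.filter (fun y => y == x) = [] := by
        have hx' : x ∉ t := (List.nodup_cons.mp hnd).1
        rw [ih x (List.nodup_cons.mp hnd).2]
        rw [if_neg hx']
      rw [this]
    · rw [if_neg (by simpa using hx), ih c (List.nodup_cons.mp hnd).2]
      by_cases hc : c ∈ t
      · rw [if_pos hc, if_pos (by simp [hc])]
      · rw [if_neg hc, if_neg (by simp [hc, Ne.symm, hx])]

-- ----- the inverted index, characterised -----

theorem pvIndexFlatten (σ : String → List String) (present : List String) :
    present.foldl (fun d p => (σ p).foldl (fun d c => d.modify c [] (fun l => l ++ [p])) d)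
      PySem.Dict.empty =
    (present.flatMap (fun p => (σ p).map (fun c => (c, p)))).foldl
      (fun d cp => d.modify cp.1 [] (fun l => l ++ [cp.2])) PySem.Dict.empty := by
  rw [pvFoldlFlatMap]
  apply PySem.List.foldl_congr_mem
  intro d p _
  rw [List.foldl_map]

theorem pvBucket (σ : String → List String) (present : List String)
    (hσ : ∀ p ∈ present, (σ p).Nodup) (c : String) :
    ((present.flatMap (fun p => (σ p).map (fun c => (c, p)))).foldl
      (fun d cp => d.modify cp.1 [] (fun l => l ++ [cp.2])) PySem.Dict.empty).getD c [] =
    present.filter (fun p => (σ p).contains c) := by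
  rw [PySem.Dict.getD_foldl_modify_append]
  have hempty : (PySem.Dict.empty : PySem.Dict String (List String)).getD c [] = [] := by
    rw [PySem.Dict.getD_empty]
  rw [hempty, List.nil_append]
  induction present with
  | nil => rfl
  | cons p t ih =>
    rw [List.flatMap_cons, List.filter_append, List.map_append, List.filter_cons]
    have h1 : ((σ p).map (fun c' => (c', p))).filter (fun cp => cp.1 == c) =
        ((σ p).filter (fun c' => c' == c)).map (fun c' => (c', p)) := by
      rw [List.filter_map]
      rfl
    rw [h1, pvFilterBeq (σ p) c (hσ p (by simp))]
    have ih' := ih (fun q hq => hσ q (by simp [hq]))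
    by_cases hcp : c ∈ σ p
    · rw [if_pos hcp, if_pos (by rw [List.contains_iff_mem]; exact hcp)]
      rw [ih']
      rfl
    · rw [if_neg hcp, if_neg (fun h => hcp (List.contains_iff_mem.mp h))]
      rw [ih']
      rfl

theorem pvIndexKeys (σ : String → List String) (present : List String) :
    ((present.flatMap (fun p => (σ p).map (fun c => (c, p)))).foldl
      (fun d cp => d.modify cp.1 [] (fun l => l ++ [cp.2])) PySem.Dict.empty).keys =
    PySem.Set.ofList ((present.flatMap (fun p => (σ p).map (fun c => (c, p)))).map (·.1)) := by
  exact PySem.Dict.keys_foldl_modify_key _ (fun cp : String × String => cp.1) []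
    (fun d cp => fun l => l ++ [cp.2]) PySem.Dict.empty

theorem pvIndexKeysNodup (σ : String → List String) (present : List String) :
    ((present.flatMap (fun p => (σ p).map (fun c => (c, p)))).foldl
      (fun d cp => d.modify cp.1 [] (fun l => l ++ [cp.2])) PySem.Dict.empty).keys.Nodup := by
  exact PySem.Dict.nodup_keys_foldl_modify_key _ (fun cp : String × String => cp.1) []
    (fun d cp => fun l => l ++ [cp.2]) PySem.Dict.empty (by simp [PySem.Dict.keys_empty])

theorem pvIndexKeysMem (σ : String → List String) (present : List String) (c : String) :
    (c ∈ ((present.flatMap (fun p => (σ p).map (fun c => (c, p)))).foldl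
      (fun d cp => d.modify cp.1 [] (fun l => l ++ [cp.2])) PySem.Dict.empty).keys ↔
      ∃ p ∈ present, c ∈ σ p) := by
  rw [pvIndexKeys, PySem.Set.mem_ofList]
  constructor
  · intro h
    obtain ⟨cp, hcp, rfl⟩ := List.mem_map.mp h
    obtain ⟨p, hp, hcp'⟩ := List.mem_flatMap.mp hcp
    obtain ⟨c', hc', rfl⟩ := List.mem_map.mp hcp'
    exact ⟨p, hp, hc'⟩
  · rintro ⟨p, hp, hc⟩
    exact List.mem_map.mpr ⟨(c, p), List.mem_flatMap.mpr ⟨p, hp,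
      List.mem_map.mpr ⟨c, hc, rfl⟩⟩, rfl⟩

theorem pvFoldlMinMem {α : Type} (f : α → α → Bool) :
    ∀ (gs : List α) (g0 : α), gs.foldl (fun b g => if f g b then g else b) g0 ∈ g0 :: gs := by
  intro gs
  induction gs with
  | nil => intro g0; simp
  | cons g gs ih =>
    intro g0
    rw [List.foldl_cons]
    by_cases h : f g g0
    · rw [if_pos h]
      exact List.mem_cons.mpr (Or.inr (ih g))
    · rw [if_neg h]
      rcases List.mem_cons.mp (ih g0) with h' | h'
      · exact List.mem_cons.mpr (Or.inl h')
      · exact List.mem_cons.mpr (Or.inr (List.mem_cons.mpr (Or.inr h')))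

theorem pvIsdisjointFalse (s t : List String) :
    (PySem.Set.isdisjoint s t = false) ↔ ∃ c, c ∈ s ∧ c ∈ t := by
  simp only [PySem.Set.isdisjoint, Bool.not_eq_false', List.any_eq_true,
    PySem.Set.contains_iff]

theorem pvRepsAuxLen (R : String → String) :
    ∀ (l acc : List String), acc.length ≤ (pvRepsAux R acc l).length := by
  intro l
  induction l with
  | nil => intro acc; exact le_rfl
  | cons p t ih =>
    intro acc
    show acc.length ≤ (pvRepsAux R (if (acc.map R).contains (R p) then acc else acc ++ [p]) t).length
    refine le_trans ?_ (ih _)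
    by_cases h : (acc.map R).contains (R p)
    · rw [if_pos h]
    · rw [if_neg h]
      simp

theorem pvMinFoldC :
    ∀ (gs : List (PySem.Set String)) (g0 : PySem.Set String),
    List.foldl
      (fun b g =>
        match b with
        | none => some (g, -PySem.Set.len g, PySem.Str.join "+" (PySem.List.sorted g fun x => x))
        | some gb =>
          if -PySem.Set.len g < gb.2.1 ∨ (-PySem.Set.len g = gb.2.1 ∧
              PySem.Str.join "+" (PySem.List.sorted g fun x => x) < gb.2.2) then
            some (g, -PySem.Set.len g, PySem.Str.join "+" (PySem.List.sorted g fun x => x))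
          else some gb)
      (some (g0, -PySem.Set.len g0, PySem.Str.join "+" (PySem.List.sorted g0 fun x => x))) gs =
    some (gs.foldl (fun b g =>
        if (decide (-PySem.Set.len g < -PySem.Set.len b) ||
            (!decide (-PySem.Set.len b < -PySem.Set.len g) &&
              decide (PySem.Str.join "+" (PySem.List.sorted g fun x => x) <
                PySem.Str.join "+" (PySem.List.sorted b fun x => x)))) then g else b) g0,
      -PySem.Set.len (gs.foldl (fun b g =>
        if (decide (-PySem.Set.len g < -PySem.Set.len b) ||
            (!decide (-PySem.Set.len b < -PySem.Set.len g) &&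
              decide (PySem.Str.join "+" (PySem.List.sorted g fun x => x) <
                PySem.Str.join "+" (PySem.List.sorted b fun x => x)))) then g else b) g0),
      PySem.Str.join "+" (PySem.List.sorted (gs.foldl (fun b g =>
        if (decide (-PySem.Set.len g < -PySem.Set.len b) ||
            (!decide (-PySem.Set.len b < -PySem.Set.len g) &&
              decide (PySem.Str.join "+" (PySem.List.sorted g fun x => x) <
                PySem.Str.join "+" (PySem.List.sorted b fun x => x)))) then g else b) g0)
        fun x => x)) := by
  intro gs
  induction gs with
  | nil => intro g0; rfl
  | cons g gs ih =>
    intro g0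
    rw [List.foldl_cons, List.foldl_cons]
    have hred : (match (some (g0, -PySem.Set.len g0,
          PySem.Str.join "+" (PySem.List.sorted g0 fun x => x)) :
          Option (PySem.Set String × (Int × String))) with
        | none => some (g, -PySem.Set.len g, PySem.Str.join "+" (PySem.List.sorted g fun x => x))
        | some gb =>
          if -PySem.Set.len g < gb.2.1 ∨ (-PySem.Set.len g = gb.2.1 ∧
              PySem.Str.join "+" (PySem.List.sorted g fun x => x) < gb.2.2) then
            some (g, -PySem.Set.len g, PySem.Str.join "+" (PySem.List.sorted g fun x => x))
          else some gb) =
        (if -PySem.Set.len g < -PySem.Set.len g0 ∨ (-PySem.Set.len g = -PySem.Set.len g0 ∧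
            PySem.Str.join "+" (PySem.List.sorted g fun x => x) <
              PySem.Str.join "+" (PySem.List.sorted g0 fun x => x)) then
          some (g, -PySem.Set.len g, PySem.Str.join "+" (PySem.List.sorted g fun x => x))
        else some (g0, -PySem.Set.len g0,
          PySem.Str.join "+" (PySem.List.sorted g0 fun x => x))) := rfl
    rw [hred]
    have hiff : (-PySem.Set.len g < -PySem.Set.len g0 ∨ (-PySem.Set.len g = -PySem.Set.len g0 ∧
        PySem.Str.join "+" (PySem.List.sorted g fun x => x) <
          PySem.Str.join "+" (PySem.List.sorted g0 fun x => x))) ↔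
        (decide (-PySem.Set.len g < -PySem.Set.len g0) ||
          (!decide (-PySem.Set.len g0 < -PySem.Set.len g) &&
            decide (PySem.Str.join "+" (PySem.List.sorted g fun x => x) <
              PySem.Str.join "+" (PySem.List.sorted g0 fun x => x)))) = true := by
      simp only [Bool.or_eq_true, Bool.and_eq_true, Bool.not_eq_true',
        decide_eq_true_eq, decide_eq_false_iff_not]
      constructor
      · rintro (h | ⟨h1, h2⟩)
        · exact Or.inl h
        · exact Or.inr ⟨by omega, h2⟩
      · rintro (h | ⟨h1, h2⟩)
        · exact Or.inl h
        · by_cases hlt : -PySem.Set.len g < -PySem.Set.len g0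
          · exact Or.inl hlt
          · exact Or.inr ⟨by omega, h2⟩
    by_cases hc : (-PySem.Set.len g < -PySem.Set.len g0 ∨ (-PySem.Set.len g = -PySem.Set.len g0 ∧
        PySem.Str.join "+" (PySem.List.sorted g fun x => x) <
          PySem.Str.join "+" (PySem.List.sorted g0 fun x => x)))
    · rw [if_pos hc, if_pos (hiff.mp hc)]
      exact ih g
    · rw [if_neg hc, if_neg (fun h => hc (hiff.mpr h))]
      exact ih g0

theorem pvMinFoldC0 (gs : List (PySem.Set String)) (g0 : PySem.Set String) :
    List.foldl
      (fun b g =>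
        match b with
        | none => some (g, -PySem.Set.len g, PySem.Str.join "+" (PySem.List.sorted g fun x => x))
        | some gb =>
          if -PySem.Set.len g < gb.2.1 ∨ (-PySem.Set.len g = gb.2.1 ∧
              PySem.Str.join "+" (PySem.List.sorted g fun x => x) < gb.2.2) then
            some (g, -PySem.Set.len g, PySem.Str.join "+" (PySem.List.sorted g fun x => x))
          else some gb)
      none (g0 :: gs) =
    some (gs.foldl (fun b g =>
        if (decide (-PySem.Set.len g < -PySem.Set.len b) ||
            (!decide (-PySem.Set.len b < -PySem.Set.len g) &&
              decide (PySem.Str.join "+" (PySem.List.sorted g fun x => x) <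
                PySem.Str.join "+" (PySem.List.sorted b fun x => x)))) then g else b) g0,
      -PySem.Set.len (gs.foldl (fun b g =>
        if (decide (-PySem.Set.len g < -PySem.Set.len b) ||
            (!decide (-PySem.Set.len b < -PySem.Set.len g) &&
              decide (PySem.Str.join "+" (PySem.List.sorted g fun x => x) <
                PySem.Str.join "+" (PySem.List.sorted b fun x => x)))) then g else b) g0),
      PySem.Str.join "+" (PySem.List.sorted (gs.foldl (fun b g =>
        if (decide (-PySem.Set.len g < -PySem.Set.len b) ||
            (!decide (-PySem.Set.len b < -PySem.Set.len g) &&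
              decide (PySem.Str.join "+" (PySem.List.sorted g fun x => x) <
                PySem.Str.join "+" (PySem.List.sorted b fun x => x)))) then g else b) g0)
        fun x => x)) := by
  rw [List.foldl_cons]
  exact pvMinFoldC gs g0

theorem pvPresentNodup (company_sets : List (String × List String))
    (hknd : (company_sets.map (·.1)).Nodup) :
    (List.map (fun x => x.1) (List.filter (fun ps => !ps.2.isEmpty) company_sets)).Nodup := by
  have hsub : List.Sublist ((List.filter (fun ps => !ps.2.isEmpty) company_sets).map
      (fun x => x.1)) (company_sets.map (fun x => x.1)) := List.Sublist.map _ List.filter_sublist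
  exact hsub.nodup hknd

theorem pvPresentMem (company_sets : List (String × List String))
    (hknd : (company_sets.map (·.1)).Nodup) (p : String)
    (hp : p ∈ List.map (fun x => x.1) (List.filter (fun ps => !ps.2.isEmpty) company_sets)) :
    ∃ v, (p, v) ∈ company_sets ∧
      pvGetSet { items := company_sets } p = v ∧ v ≠ [] := by
  obtain ⟨pr, hpr, rfl⟩ := List.mem_map.mp hp
  have hprmem : pr ∈ company_sets := List.mem_of_mem_filter hpr
  have hprval := (List.mem_filter.mp hpr).2
  have hget : ({ items := company_sets } : PySem.Dict String (List String)).get? pr.1 =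
      some pr.2 := by
    apply PySem.Dict.get?_of_mem_items
    · show (pr.1, pr.2) ∈ company_sets
      simpa using hprmem
    · exact hknd
  refine ⟨pr.2, by simpa using hprmem, ?_, ?_⟩
  · show ({ items := company_sets } : PySem.Dict String (List String)).getD pr.1 [] = pr.2
    rw [PySem.Dict.getD, hget]
    rfl
  · intro hcon
    rw [hcon] at hprval
    simp at hprval

set_option maxHeartbeats 2000000 in
theorem pvMain (company_sets : List (String × List String))
    (hpre : Pre_company_strict_majority_consensus_py company_sets) :
    company_strict_majority_consensus_py company_sets =
      company_strict_majority_consensus_py_alt company_sets := by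
  obtain ⟨hknd, hvnd⟩ := hpre
  simp only [company_strict_majority_consensus_py, company_strict_majority_consensus_py_alt]
  rw [show pvGetSetB = pvGetSet from rfl]
  set cs : PySem.Dict String (List String) := ⟨company_sets⟩ with hcs
  set pres : List String :=
    List.map (fun x => x.1) (List.filter (fun ps => !ps.2.isEmpty) company_sets) with hpres
  by_cases hlen : pres.length < 2
  · rw [if_pos hlen, if_pos hlen]
  rw [if_neg hlen, if_neg hlen]
  -- ---- shared facts ----
  have hnd : pres.Nodup := pvPresentNodup company_sets hknd
  have hmem : ∀ p ∈ pres, ∃ v, (p, v) ∈ company_sets ∧ pvGetSet cs p = v ∧ v ≠ [] :=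
    fun p hp => pvPresentMem company_sets hknd p hp
  have hσnd : ∀ p ∈ pres, (pvGetSet cs p).Nodup := by
    intro p hp
    obtain ⟨v, hv, heq, _⟩ := hmem p hp
    rw [heq]
    exact hvnd (p, v) hv
  set par0 : PySem.Dict String String :=
    pres.foldl (fun d p => d.insert p p) PySem.Dict.empty with hpar0
  -- ---- A's union-find over all overlapping pairs ----
  set EA : List (String × String) :=
    pvPairList (fun a b => !PySem.Set.isdisjoint (pvGetSet cs a) (pvGetSet cs b)) pres with hEA
  have hloopA : (PySem.List.enumerate pres).foldl (fun par ia =>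
      (PySem.List.slice pres (some (ia.1 + 1)) none).foldl (fun par b =>
        if PySem.Set.isdisjoint (pvGetSet cs ia.2) (pvGetSet cs b) = true then par
        else pvUnionA par ia.2 b) par) par0 =
      EA.foldl (fun par e => pvUnionA par e.1 e.2) par0 := by
    have h := pvALoopFlatten pres (pvGetSet cs) pres 0 par0 (by simp)
    have hcast : ((0 : Nat) : Int) = (0 : Int) := rfl
    rw [hcast] at h
    exact h
  have hEAmem : ∀ e ∈ EA, e.1 ∈ pres ∧ e.2 ∈ pres := by
    intro e he
    obtain ⟨h1, h2, _⟩ := pvPairList_mem _ pres he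
    exact ⟨h1, h2⟩
  obtain ⟨hkeysA, hgA, hkerA⟩ := pvProc hnd pvUnionA
    (fun par a b h1 h2 h3 h4 => pvUnionA_spec par a b h1 h2 h3 h4) EA hEAmem
  -- ---- B's index and union-find over bucket chains ----
  set idx : PySem.Dict String (List String) :=
    pres.foldl (fun d p =>
      (pvGetSet cs p).foldl (fun d c => d.modify c [] (fun l => l ++ [p])) d)
      PySem.Dict.empty with hidx
  set pairs : List (String × String) :=
    pres.flatMap (fun p => (pvGetSet cs p).map (fun c => (c, p))) with hpairs
  have hidxflat : idx = pairs.foldl (fun d cp => d.modify cp.1 [] (fun l => l ++ [cp.2]))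
      PySem.Dict.empty := pvIndexFlatten (pvGetSet cs) pres
  have hbucket : ∀ c, idx.getD c [] = pres.filter (fun p => (pvGetSet cs p).contains c) := by
    intro c
    rw [hidxflat]
    exact pvBucket (pvGetSet cs) pres hσnd c
  have hkeysnd : idx.keys.Nodup := by
    rw [hidxflat]; exact pvIndexKeysNodup (pvGetSet cs) pres
  have hkeysmem : ∀ c, c ∈ idx.keys ↔ ∃ p ∈ pres, c ∈ pvGetSet cs p := by
    intro c
    rw [hidxflat]
    exact pvIndexKeysMem (pvGetSet cs) pres c
  have hvalsidx : idx.values = idx.keys.map (fun c => idx.getD c []) :=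
    PySem.Dict.values_eq_map_keys idx hkeysnd []
  set EB : List (String × String) := idx.values.flatMap (fun ps => ps.zip ps.tail) with hEB
  have hloopB : idx.values.foldl (fun par ps =>
      (ps.zip (PySem.List.slice ps (some 1) none)).foldl pvStepB par) par0 =
      EB.foldl (fun par e => pvStepB par (e.1, e.2)) par0 :=
    pvBLoopFlatten idx.values par0
  have hEBmem : ∀ e ∈ EB, e.1 ∈ pres ∧ e.2 ∈ pres := by
    intro e he
    obtain ⟨ps, hps, hzip⟩ := List.mem_flatMap.mp he
    obtain ⟨c, hc, rfl⟩ := by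
      rw [hvalsidx] at hps
      exact List.mem_map.mp hps
    rw [hbucket c] at hzip
    have h1 := List.of_mem_zip hzip
    constructor
    · exact List.mem_of_mem_filter h1.1
    · exact List.mem_of_mem_filter (List.mem_of_mem_tail h1.2)
  have hBfold : EB.foldl (fun par e => pvStepB par (e.1, e.2)) par0 =
      EB.foldl (fun par e => (fun par a b => pvStepB par (a, b)) par e.1 e.2) par0 := rfl
  obtain ⟨hkeysB, hgB, hkerB⟩ := pvProc hnd (fun par a b => pvStepB par (a, b))
    (fun par a b h1 h2 h3 h4 => pvStepB_spec par a b h1 h2 h3 h4) EB hEBmem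
  -- ---- the two kernels agree ----
  have hAB : ∀ e ∈ EA, pvKer EB e.1 e.2 := by
    intro e he
    obtain ⟨h1, h2, hov⟩ := pvPairList_mem _ pres he
    have hdis : PySem.Set.isdisjoint (pvGetSet cs e.1) (pvGetSet cs e.2) = false := by
      rcases Bool.eq_false_or_eq_true (PySem.Set.isdisjoint (pvGetSet cs e.1) (pvGetSet cs e.2))
        with h | h
      · rw [h] at hov; simp at hov
      · exact h
    obtain ⟨c, hc1, hc2⟩ := (pvIsdisjointFalse _ _).mp hdis
    have hcin : (pres.filter (fun p => (pvGetSet cs p).contains c)) ∈ idx.values := by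
      rw [hvalsidx]
      refine List.mem_map.mpr ⟨c, ?_, hbucket c⟩
      exact (hkeysmem c).mpr ⟨e.1, h1, hc1⟩
    have hchain := pvChainConn EB (pres.filter (fun p => (pvGetSet cs p).contains c))
      (by
        intro pr hpr
        exact List.mem_flatMap.mpr ⟨_, hcin, hpr⟩)
    exact hchain e.1 (List.mem_filter.mpr ⟨h1, List.contains_iff_mem.mpr hc1⟩)
      e.2 (List.mem_filter.mpr ⟨h2, List.contains_iff_mem.mpr hc2⟩)
  have hBA : ∀ e ∈ EB, pvKer EA e.1 e.2 := by
    intro e he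
    obtain ⟨ps, hps, hzip⟩ := List.mem_flatMap.mp he
    obtain ⟨c, hc, rfl⟩ := by
      rw [hvalsidx] at hps
      exact List.mem_map.mp hps
    rw [hbucket c] at hzip
    have hzip' : (e.1, e.2) ∈ (pres.filter (fun p => (pvGetSet cs p).contains c)).zip
        (pres.filter (fun p => (pvGetSet cs p).contains c)).tail := by
      simpa using hzip
    have hsub : [e.1, e.2].Sublist pres :=
      (pvZipAdj _ hzip').trans List.filter_sublist
    obtain ⟨l1, l2, hsplit, hv⟩ := pvSublistSplit pres hsub
    have hmm := List.of_mem_zip hzip'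
    have hc1 : c ∈ pvGetSet cs e.1 :=
      List.contains_iff_mem.mp (List.mem_filter.mp hmm.1).2
    have hc2 : c ∈ pvGetSet cs e.2 :=
      List.contains_iff_mem.mp (List.mem_filter.mp (List.mem_of_mem_tail hmm.2)).2
    have hov : (!PySem.Set.isdisjoint (pvGetSet cs e.1) (pvGetSet cs e.2)) = true := by
      have := (pvIsdisjointFalse (pvGetSet cs e.1) (pvGetSet cs e.2)).mpr ⟨c, hc1, hc2⟩
      rw [this]
      rfl
    have := pvPairList_of_split (fun a b => !PySem.Set.isdisjoint (pvGetSet cs a) (pvGetSet cs b))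
      l1 l2 hov hv
    rw [← hsplit] at this
    exact Relation.EqvGen.rel _ _ this
  set fA := pvPget (EA.foldl (fun par e => pvUnionA par e.1 e.2) par0) with hfA
  set fB := pvPget (EB.foldl (fun par e =>
    (fun par a b => pvStepB par (a, b)) par e.1 e.2) par0) with hfB
  have hkerEq : ∀ y ∈ pres, ∀ z ∈ pres,
      (pvRoot fA y = pvRoot fA z ↔ pvRoot fB y = pvRoot fB z) := by
    intro y hy z hz
    rw [hkerA y hy z hz, hkerB y hy z hz]
    constructor
    · exact fun h => pvKer_mono (fun u v huv => hAB (u, v) huv) h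
    · exact fun h => pvKer_mono (fun u v huv => hBA (u, v) huv) h
  -- ---- comps stage: groups agree ----
  have hcompsA : (pres.foldl (fun st p =>
      ((pvFindA (st.1.size + 1) st.1 p).1,
        st.2.modify (pvFindA (st.1.size + 1) st.1 p).2 PySem.Set.empty
          (fun s => PySem.Set.add s p)))
      (EA.foldl (fun par e => pvUnionA par e.1 e.2) par0, PySem.Dict.empty)).2 =
      pres.foldl (fun c p => c.modify (pvRoot fA p) PySem.Set.empty
        (fun s => PySem.Set.add s p)) PySem.Dict.empty :=
    pvCompsA pres (fun p hp => hp) _ PySem.Dict.empty hkeysA hgA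
  have hcompsB : pres.foldl (fun c p =>
      c.modify (pvFindB ((EB.foldl (fun par e => pvStepB par (e.1, e.2)) par0).size + 1)
        (EB.foldl (fun par e => pvStepB par (e.1, e.2)) par0) p) PySem.Set.empty
        (fun s => PySem.Set.add s p)) PySem.Dict.empty =
      pres.foldl (fun c p => c.modify (pvRoot fB p) PySem.Set.empty
        (fun s => PySem.Set.add s p)) PySem.Dict.empty := by
    rw [hBfold]
    exact pvCompsB _ hkeysB hgB pres (fun p hp => hp) PySem.Dict.empty
  have hitemsA := pvGroupsItems (pvRoot fA) pres hnd
  have hitemsB := pvGroupsItems (pvRoot fB) pres hnd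
  have hreps : pvRepsAux (pvRoot fA) [] pres = pvRepsAux (pvRoot fB) [] pres :=
    pvRepsAux_congr hkerEq pres [] (fun p hp => hp) (fun p hp => by simp at hp)
  have hgroups : (pres.foldl (fun c p => c.modify (pvRoot fA p) PySem.Set.empty
        (fun s => PySem.Set.add s p)) PySem.Dict.empty).values =
      (pres.foldl (fun c p => c.modify (pvRoot fB p) PySem.Set.empty
        (fun s => PySem.Set.add s p)) PySem.Dict.empty).values := by
    rw [PySem.Dict.values, PySem.Dict.values, hitemsA, hitemsB, hreps,
      List.map_map, List.map_map]
    apply List.map_congr_left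
    intro q hq
    have hqpres : q ∈ pres := by
      rcases pvRepsAux_subset (pvRoot fB) pres [] q hq with h | h
      · simp at h
      · exact h
    simp only [Function.comp]
    apply List.filter_congr
    intro p hp
    have h1 := hkerEq p hp q hqpres
    rcases Bool.eq_false_or_eq_true (pvRoot fA p == pvRoot fA q) with h | h
    · rw [h]
      symm
      rw [beq_iff_eq] at h ⊢
      exact h1.mp h
    · rw [h]
      symm
      rw [beq_eq_false_iff_ne] at h ⊢
      intro hcon
      exact h (h1.mpr hcon)
  rw [hloopA, hloopB, hcompsA, hcompsB, hgroups]
  set G : List (PySem.Set String) :=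
    (pres.foldl (fun c p => c.modify (pvRoot fB p) PySem.Set.empty
      (fun s => PySem.Set.add s p)) PySem.Dict.empty).values with hGdef
  have hitemsB := pvGroupsItems (pvRoot fB) pres hnd
  have hGvals : G = (pvRepsAux (pvRoot fB) [] pres).map
      (fun q => pres.filter (fun p => pvRoot fB p == pvRoot fB q)) := by
    rw [hGdef, PySem.Dict.values, hitemsB, List.map_map]
    apply List.map_congr_left
    intro q _
    rfl
  obtain ⟨p1, t1, hpres1⟩ : ∃ p1 t1, pres = p1 :: t1 := by
    cases hp : pres with
    | nil => rw [hp] at hlen; simp at hlen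
    | cons a t => exact ⟨a, t, rfl⟩
  have hGne : G ≠ [] := by
    rw [hGvals]
    intro h
    have hlen1 := congrArg List.length h
    rw [List.length_map] at hlen1
    have h2 : 1 ≤ (pvRepsAux (pvRoot fB) [] pres).length := by
      rw [hpres1]
      have h3 : pvRepsAux (pvRoot fB) [] (p1 :: t1) = pvRepsAux (pvRoot fB) [p1] t1 := rfl
      rw [h3]
      have h4 := pvRepsAuxLen (pvRoot fB) t1 [p1]
      simpa using h4
    rw [List.length_nil] at hlen1
    omega
  obtain ⟨g0, gs, hG0⟩ : ∃ g0 gs, G = g0 :: gs := by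
    cases hG' : G with
    | nil => exact absurd hG' hGne
    | cons a t => exact ⟨a, t, rfl⟩
  rw [hG0]
  rw [pvSorted2Head (fun s => -PySem.Set.len s)
    (fun s => PySem.Str.join "+" (PySem.List.sorted s (fun x => x))) [] g0 gs]
  rw [pvMinFoldC0 gs g0]
  set M : PySem.Set String := gs.foldl (fun b g =>
      if (decide (-PySem.Set.len g < -PySem.Set.len b) ||
          (!decide (-PySem.Set.len b < -PySem.Set.len g) &&
            decide (PySem.Str.join "+" (PySem.List.sorted g fun x => x) <
              PySem.Str.join "+" (PySem.List.sorted b fun x => x)))) then g else b) g0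
    with hMdef
  show (if 2 * PySem.Set.len M ≤ (pres.length : Int) then ([], [])
      else
        if (match PySem.List.sorted M (fun x => x) with
            | [] => []
            | p :: ps => ps.foldl (fun acc q => PySem.Set.inter acc (pvGetSet cs q))
                (pvGetSet cs p)).isEmpty = true then ([], [])
        else (PySem.List.sorted M (fun x => x),
          PySem.List.sorted (match PySem.List.sorted M (fun x => x) with
            | [] => []
            | p :: ps => ps.foldl (fun acc q => PySem.Set.inter acc (pvGetSet cs q))
                (pvGetSet cs p)) (fun x => x))) =
      (if 2 * PySem.Set.len M ≤ (pres.length : Int) then ([], [])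
      else
        if (PySem.List.sorted (List.map (fun x => x.1)
            (List.filter (fun cps => PySem.Set.issubset M cps.2) idx.items))
            (fun x => x)).isEmpty = true then ([], [])
        else (PySem.List.sorted M (fun x => x),
          PySem.List.sorted (List.map (fun x => x.1)
            (List.filter (fun cps => PySem.Set.issubset M cps.2) idx.items)) (fun x => x)))
  by_cases hmaj : 2 * PySem.Set.len M ≤ (pres.length : Int)
  · rw [if_pos hmaj, if_pos hmaj]
  rw [if_neg hmaj, if_neg hmaj]
  have hMG : M ∈ g0 :: gs := pvFoldlMinMem _ gs g0
  have hMsub : ∀ x ∈ M, x ∈ pres := by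
    have hMG' : M ∈ G := by rw [hG0]; exact hMG
    rw [hGvals] at hMG'
    obtain ⟨q, _, hqeq⟩ := List.mem_map.mp hMG'
    intro x hx
    rw [← hqeq] at hx
    exact List.mem_of_mem_filter hx
  have hMne : M ≠ [] := by
    intro h
    apply hmaj
    rw [h]
    show 2 * PySem.Set.len ([] : PySem.Set String) ≤ (pres.length : Int)
    have hz : PySem.Set.len ([] : PySem.Set String) = 0 := rfl
    rw [hz]
    omega
  obtain ⟨q0, qs, hq⟩ : ∃ q0 qs, PySem.List.sorted M (fun x => x) = q0 :: qs := by
    cases hs : PySem.List.sorted M (fun x => x) with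
    | nil => exact absurd ((PySem.List.sorted_eq_nil_iff M _ _).mp hs) hMne
    | cons a t => exact ⟨a, t, rfl⟩
  rw [hq]
  show (if (qs.foldl (fun acc q => PySem.Set.inter acc (pvGetSet cs q))
        (pvGetSet cs q0)).isEmpty = true then (([] : List String), ([] : List String))
      else (q0 :: qs, PySem.List.sorted (qs.foldl (fun acc q =>
        PySem.Set.inter acc (pvGetSet cs q)) (pvGetSet cs q0)) (fun x => x))) = _
  set IA : List String :=
    qs.foldl (fun acc q => PySem.Set.inter acc (pvGetSet cs q)) (pvGetSet cs q0) with hIAdef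
  set IB : List String :=
    List.map (fun x => x.1) (List.filter (fun cps => PySem.Set.issubset M cps.2) idx.items)
    with hIBdef
  have hsortmem : ∀ x, x ∈ q0 :: qs ↔ x ∈ M := by
    intro x
    rw [← hq]
    simp [PySem.List.mem_sorted]
  have hq0M : q0 ∈ M := (hsortmem q0).mp (by simp)
  have hq0pres : q0 ∈ pres := hMsub q0 hq0M
  have hIBkeys : IB = idx.keys.filter (fun c => PySem.Set.issubset M (idx.getD c [])) := by
    rw [hIBdef, PySem.Dict.items_eq_map_keys idx hkeysnd ([] : List String), List.filter_map,
      List.map_map]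
    have h1 : List.filter ((fun cps => PySem.Set.issubset M cps.2) ∘
        (fun k => (k, idx.getD k []))) idx.keys =
        idx.keys.filter (fun c => PySem.Set.issubset M (idx.getD c [])) := by
      apply List.filter_congr
      intro c _
      rfl
    rw [h1]
    have h2 : List.map ((fun x => x.1) ∘ (fun k => ((k : String), idx.getD k [])))
        (idx.keys.filter (fun c => PySem.Set.issubset M (idx.getD c []))) =
        List.map id (idx.keys.filter (fun c => PySem.Set.issubset M (idx.getD c []))) := by
      apply List.map_congr_left
      intro c _
      rfl
    rw [h2, List.map_id]
  have hAmem : ∀ c, c ∈ IA ↔ ∀ q ∈ M, c ∈ pvGetSet cs q := by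
    intro c
    rw [hIAdef, pvInterMem]
    constructor
    · rintro ⟨h0, hrest⟩ q hqM
      rcases List.mem_cons.mp ((hsortmem q).mpr hqM) with rfl | hq'
      · exact h0
      · exact hrest q hq'
    · intro h
      exact ⟨h q0 hq0M, fun q hq' => h q ((hsortmem q).mp (List.mem_cons.mpr (Or.inr hq')))⟩
  have hBmem : ∀ c, c ∈ IB ↔ (c ∈ idx.keys ∧ ∀ q ∈ M, q ∈ idx.getD c []) := by
    intro c
    rw [hIBkeys, List.mem_filter]
    constructor
    · rintro ⟨h1, h2⟩
      refine ⟨h1, ?_⟩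
      rw [PySem.Set.issubset, List.all_eq_true] at h2
      intro q hqM
      exact (PySem.Set.contains_iff _ _).mp (h2 q hqM)
    · rintro ⟨h1, h2⟩
      refine ⟨h1, ?_⟩
      rw [PySem.Set.issubset, List.all_eq_true]
      intro q hqM
      exact (PySem.Set.contains_iff _ _).mpr (h2 q hqM)
  have hext : ∀ c, c ∈ IA ↔ c ∈ IB := by
    intro c
    rw [hAmem, hBmem]
    constructor
    · intro h
      refine ⟨(hkeysmem c).mpr ⟨q0, hq0pres, h q0 hq0M⟩, ?_⟩
      intro q hqM
      rw [hbucket c]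
      exact List.mem_filter.mpr ⟨hMsub q hqM, List.contains_iff_mem.mpr (h q hqM)⟩
    · rintro ⟨h1, h2⟩ q hqM
      have h3 := h2 q hqM
      rw [hbucket c] at h3
      exact List.contains_iff_mem.mp (List.mem_filter.mp h3).2
  have hIAnd : IA.Nodup := by
    rw [hIAdef]
    exact pvInterNodup _ qs _ (hσnd q0 hq0pres)
  have hIBnd : IB.Nodup := by
    rw [hIBkeys]
    exact hkeysnd.filter _
  have hperm : IA.Perm IB := (List.perm_ext_iff_of_nodup hIAnd hIBnd).mpr hext
  have hsorted : PySem.List.sorted IA (fun x => x) = PySem.List.sorted IB (fun x => x) :=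
    PySem.List.sorted_eq_sorted_of_perm IA IB (fun x => x) (fun a b h => h) hperm
  by_cases hemp : IA.isEmpty = true
  · have hIBnil : IB = [] := by
      rw [List.isEmpty_iff] at hemp
      exact List.Perm.eq_nil (hemp ▸ hperm).symm
    rw [if_pos hemp, if_pos (by
      rw [hIBnil]
      rfl)]
  · rw [if_neg hemp, if_neg (by
      intro hcon
      apply hemp
      rw [← hsorted] at hcon
      rw [List.isEmpty_iff] at hcon ⊢
      rw [PySem.List.sorted_eq_nil_iff] at hcon
      exact hcon)]
    rw [Prod.mk.injEq]
    exact ⟨rfl, hsorted⟩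

-- ===== VERDICT (by name: the statement is the Claim_ definition above) =====
theorem company_strict_majority_consensus_py_spec :
    Claim_equal_company_strict_majority_consensus_py := by
  intro company_sets _ hpre
  show company_strict_majority_consensus_py company_sets =
    company_strict_majority_consensus_py_alt company_sets
  exact pvMain company_sets hpre
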